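-- pv_equiv track=rewrite | github.com/PittYHL/Elastic_MBQC | leaves.py | rank_ends
-- ===== SOURCE A (Python) =====
-- import copy
--
-- def rank_ends(ends, shape):
--     width = len(shape)
--     start_indexes = []
--     x_locs = []
--     up_y = -1  # if y upper than this, go up
--     down_y = -1  # if y lower than this, go down
--     for end in ends:
--         x_locs.append(end[1])
--     sort_locs = copy.deepcopy(x_locs)
--     sort_locs.sort()
--     while (sort_locs) != []:
--         loc = sort_locs[0]
--         if sort_locs.count(loc) == 1:
--             start_indexes.append(x_locs.index(loc))
--             sort_locs.pop(0)
--         else: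
--             indexes = find_indices(x_locs, loc)
--             y_locs = []
--             for i in indexes:
--                 y_locs.append(ends[i][0])
--             up = min(y_locs)
--             down = width - max(y_locs) - 1
--             if up > down:
--                 while (indexes) != []:
--                     ind = y_locs.index(min(y_locs))
--                     start_indexes.append(indexes[ind])
--                     if len(sort_locs) <= 2:
--                         up_y = y_locs[ind]
--                     indexes.pop(ind)
--                     y_locs.pop(ind)
--                     sort_locs.pop(0)
--                     if indexes != []:
--                         ind = y_locs.index(max(y_locs))
--                         start_indexes.append(indexes[ind])
--                         if len(sort_locs) <= 2:
--                             down_y = y_locs[ind]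
--                         indexes.pop(ind)
--                         y_locs.pop(ind)
--                         sort_locs.pop(0)
--             else:
--                 while (indexes) != []:
--                     ind = y_locs.index(max(y_locs))
--                     start_indexes.append(indexes[ind])
--                     if len(sort_locs) <= 2:
--                         down_y = y_locs[ind]
--                     indexes.pop(ind)
--                     y_locs.pop(ind)
--                     sort_locs.pop(0)
--                     if indexes != []:
--                         ind = y_locs.index(min(y_locs))
--                         start_indexes.append(indexes[ind])
--                         if len(sort_locs) <= 2:
--                             up_y = y_locs[ind]
--                         indexes.pop(ind)
--                         y_locs.pop(ind)
--                         sort_locs.pop(0)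
--     return start_indexes, up_y, down_y
--
-- def find_indices(list_to_check, item_to_find):
--     indices = []
--     for idx, value in enumerate(list_to_check):
--         if value == item_to_find:
--             indices.append(idx)
--     return indices
-- ===== SOURCE B (Python) =====
-- def rank_ends(ends, shape):
--     width = len(shape)
--     n = len(ends)
--     order = sorted(range(n), key=lambda i: ends[i][1])  # one stable sort by x
--     start_indexes = []
--     up_y = -1
--     down_y = -1
--     pos = 0
--     g = 0
--     while g < n:
--         h = g
--         while h < n and ends[order[h]][1] == ends[order[g]][1]:
--             h += 1
--         run = order[g:h]
--         m = h - g
--         if m == 1: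
--             start_indexes.append(run[0])
--             pos += 1
--         else:
--             asc = sorted(run, key=lambda i: ends[i][0])
--             desc = sorted(run, key=lambda i: -ends[i][0])
--             take_min = ends[asc[0]][0] > width - ends[desc[0]][0] - 1
--             taken = set()
--             lo = 0
--             hi = 0
--             for _ in range(m):
--                 if take_min:
--                     while asc[lo] in taken:
--                         lo += 1
--                     i = asc[lo]
--                     lo += 1
--                 else:
--                     while desc[hi] in taken:
--                         hi += 1
--                     i = desc[hi]
--                     hi += 1
--                 taken.add(i)
--                 start_indexes.append(i)
--                 if n - pos <= 2:
--                     if take_min: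
--                         up_y = ends[i][0]
--                     else:
--                         down_y = ends[i][0]
--                 pos += 1
--                 take_min = not take_min
--         g = h
--     return start_indexes, up_y, down_y
-- ===== Notes on version B (the rewrite author's own statement) =====
-- stated objective: faster
-- what changed: B replaces A's quadratic count/index/pop(0) selection scans by one stable sort of the indices by x, splitting the sorted order into runs of equal x, and emitting each run from two pre-sorted orders (by y and by -y) consumed with two advancing pointers and a taken set, tracking the emission position for the up_y/down_y updates.
import Mathlib
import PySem

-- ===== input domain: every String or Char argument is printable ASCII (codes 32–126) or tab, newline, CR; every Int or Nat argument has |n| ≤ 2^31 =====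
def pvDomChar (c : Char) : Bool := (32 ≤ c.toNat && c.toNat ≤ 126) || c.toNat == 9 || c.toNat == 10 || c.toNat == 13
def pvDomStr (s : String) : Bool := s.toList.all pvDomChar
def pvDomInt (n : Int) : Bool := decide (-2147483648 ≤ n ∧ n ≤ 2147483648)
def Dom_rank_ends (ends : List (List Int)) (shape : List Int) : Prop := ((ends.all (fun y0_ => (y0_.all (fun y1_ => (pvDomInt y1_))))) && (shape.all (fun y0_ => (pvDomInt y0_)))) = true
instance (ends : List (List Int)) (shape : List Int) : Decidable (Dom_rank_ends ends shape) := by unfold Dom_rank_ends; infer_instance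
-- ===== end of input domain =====

-- B replaces A's repeated count/index/pop selection scans by one stable sort of the
-- indices by x, run splitting, and per run two pre-sorted orders (by y and by -y)
-- consumed with two advancing pointers and a taken set (objective: faster).

-- ===== PORT A =====
def find_indices (l : List Int) (item : Int) : List Int :=
  (PySem.List.enumerate l).foldl (fun acc p => if p.2 = item then acc ++ [p.1] else acc) []

-- one body of A's inner while loop picks min (useMin) or max of y_locs and pops;
-- none = the list was empty (unreachable under the loop guard)
def pickA (useMin : Bool) (indexes y_locs sl si : List Int) (uy dy : Int) :
    Option (List Int × List Int × List Int × List Int × Int × Int) :=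
  match (if useMin then PySem.List.min? y_locs (fun y => y) else PySem.List.max? y_locs (fun y => y)) with
  | none => none
  | some v =>
    match PySem.List.index? y_locs v with
    | none => none
    | some ind =>
      let si' := si ++ [PySem.List.pyGetD indexes (ind : Int) 0]
      let uy' := if useMin ∧ sl.length ≤ 2 then v else uy
      let dy' := if (¬ useMin) ∧ sl.length ≤ 2 then v else dy
      some (indexes.eraseIdx ind, y_locs.eraseIdx ind, sl.tail, si', uy', dy')

-- A's inner 'while (indexes) != []' (fuel = enough loop bodies; each body pops 1 or 2)
def innerA (minFirst : Bool) : Nat → List Int → List Int → List Int → List Int → Int → Int →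
    (List Int × Int × Int × List Int)
  | 0, _, _, sl, si, uy, dy => (si, uy, dy, sl)
  | fuel+1, indexes, y_locs, sl, si, uy, dy =>
    if indexes = [] then (si, uy, dy, sl) else
    match pickA minFirst indexes y_locs sl si uy dy with
    | none => (si, uy, dy, sl)
    | some (ix, yl, sl', si', uy', dy') =>
      if ix = [] then (si', uy', dy', sl') else
      match pickA (!minFirst) ix yl sl' si' uy' dy' with
      | none => (si', uy', dy', sl')
      | some (ix2, yl2, sl2, si2, uy2, dy2) => innerA minFirst fuel ix2 yl2 sl2 si2 uy2 dy2

-- A's outer 'while (sort_locs) != []' (fuel = initial length; ≥ 1 pop per iteration)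
def outerA (ends : List (List Int)) (x_locs : List Int) (width : Int) :
    Nat → List Int → List Int → Int → Int → (List Int × Int × Int)
  | 0, _, si, uy, dy => (si, uy, dy)
  | fuel+1, sl, si, uy, dy =>
    match sl with
    | [] => (si, uy, dy)
    | loc :: _ =>
      if PySem.List.count sl loc = 1 then
        outerA ends x_locs width fuel sl.tail
          (si ++ [(((PySem.List.index? x_locs loc).getD 0 : Nat) : Int)]) uy dy
      else
        let indexes := find_indices x_locs loc
        let y_locs := indexes.foldl
          (fun acc i => acc ++ [PySem.List.pyGetD (PySem.List.pyGetD ends i []) (0:Int) 0]) []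
        match PySem.List.min? y_locs (fun y => y), PySem.List.max? y_locs (fun y => y) with
        | some mn, some mx =>
          let r := innerA (decide (mn > width - mx - 1)) indexes.length indexes y_locs sl si uy dy
          outerA ends x_locs width fuel r.2.2.2 r.1 r.2.1 r.2.2.1
        | _, _ => (si, uy, dy)

def rank_ends (ends : List (List Int)) (shape : List Int) : List Int × Int × Int :=
  let width : Int := (shape.length : Int)
  let x_locs : List Int := ends.foldl (fun acc e => acc ++ [PySem.List.pyGetD e (1:Int) 0]) []
  let sort_locs := PySem.List.sorted x_locs (fun x => x) false
  outerA ends x_locs width sort_locs.length sort_locs [] (-1) (-1)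

-- ===== PORT B =====
-- ends[i][1] and ends[i][0] for an Int index i (B's two lambda keys)
def xkeyB (ends : List (List Int)) (i : Int) : Int :=
  PySem.List.pyGetD (PySem.List.pyGetD ends i []) (1:Int) 0
def ykeyB (ends : List (List Int)) (i : Int) : Int :=
  PySem.List.pyGetD (PySem.List.pyGetD ends i []) (0:Int) 0

-- B's 'while arr[p] in taken: p += 1' (fuel = arr.length, enough under the loop's invariant)
def skipPtr (arr : List Int) (tk : PySem.Set Int) : Nat → Nat → Nat
  | 0, p => p
  | f+1, p =>
    if PySem.Set.contains tk (PySem.List.pyGetD arr (p : Int) 0) then skipPtr arr tk f (p+1) else p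

-- B's 'for _ in range(m)': one emission per iteration, alternating the side
def innerLoop (ends : List (List Int)) (n : Int) :
    Nat → Bool → List Int → List Int → PySem.Set Int → Nat → Nat →
    List Int → Int → Int → Int → (List Int × Int × Int × Int)
  | 0, _, _, _, _, _, _, si, uy, dy, pos => (si, uy, dy, pos)
  | f+1, takeMin, asc, desc, tk, lo, hi, si, uy, dy, pos =>
    if takeMin then
      let lo' := skipPtr asc tk asc.length lo
      let i := PySem.List.pyGetD asc (lo' : Int) 0
      innerLoop ends n f (!takeMin) asc desc (PySem.Set.add tk i) (lo'+1) hi (si ++ [i])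
        (if n - pos ≤ 2 then ykeyB ends i else uy) dy (pos+1)
    else
      let hi' := skipPtr desc tk desc.length hi
      let i := PySem.List.pyGetD desc (hi' : Int) 0
      innerLoop ends n f (!takeMin) asc desc (PySem.Set.add tk i) lo (hi'+1) (si ++ [i])
        uy (if n - pos ≤ 2 then ykeyB ends i else dy) (pos+1)

-- B's 'while g < n': split off the current run of equal x, emit it, move to the rest
def outerB (ends : List (List Int)) (width n : Int) :
    Nat → List Int → List Int → Int → Int → Int → (List Int × Int × Int × Int)
  | 0, _, si, uy, dy, pos => (si, uy, dy, pos)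
  | f+1, rest, si, uy, dy, pos =>
    match rest with
    | [] => (si, uy, dy, pos)
    | o :: t =>
      let run := o :: t.takeWhile (fun j => decide (xkeyB ends j = xkeyB ends o))
      let t' := t.dropWhile (fun j => decide (xkeyB ends j = xkeyB ends o))
      if run.length = 1 then
        outerB ends width n f t' (si ++ [PySem.List.pyGetD run (0:Int) 0]) uy dy (pos+1)
      else
        let asc := PySem.List.sorted run (fun i => ykeyB ends i) false
        let desc := PySem.List.sorted run (fun i => -(ykeyB ends i)) false
        let takeMin := decide (ykeyB ends (PySem.List.pyGetD asc (0:Int) 0) >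
          width - ykeyB ends (PySem.List.pyGetD desc (0:Int) 0) - 1)
        let r := innerLoop ends n run.length takeMin asc desc PySem.Set.empty 0 0 si uy dy pos
        outerB ends width n f t' r.1 r.2.1 r.2.2.1 r.2.2.2

def rank_ends_alt (ends : List (List Int)) (shape : List Int) : List Int × Int × Int :=
  let width : Int := (shape.length : Int)
  let n : Int := (ends.length : Int)
  let order := PySem.List.sorted (PySem.List.pyRange 0 n 1) (fun i => xkeyB ends i) false
  let r := outerB ends width n order.length order [] (-1) (-1) 0
  (r.1, r.2.1, r.2.2.1)

-- ===== PRECONDITION & SPEC =====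
-- Pre_ excludes exactly the inputs where Python A raises IndexError: some end with
-- fewer than 2 entries (A reads end[1], and end[0] on duplicate x values).
def Pre_rank_ends (ends : List (List Int)) (shape : List Int) : Prop :=
  ∀ e ∈ ends, 2 ≤ e.length
instance (ends : List (List Int)) (shape : List Int) : Decidable (Pre_rank_ends ends shape) := by
  unfold Pre_rank_ends; infer_instance
def pvWitness_rank_ends : List (List Int) × List Int := ([[0, 1], [2, 1], [1, 0]], [0, 0, 0])

def Spec_rank_ends (ends : List (List Int)) (shape : List Int) (out : List Int × Int × Int) : Prop := out = rank_ends_alt ends shape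
instance (ends : List (List Int)) (shape : List Int) (out : List Int × Int × Int) : Decidable (Spec_rank_ends ends shape out) := by unfold Spec_rank_ends; infer_instance

-- ===== CLAIM (what is proved, stated in full; the proofs are below) =====
def Claim_equal_rank_ends : Prop := ∀ (ends : List (List Int)) (shape : List Int), Dom_rank_ends ends shape → Pre_rank_ends ends shape → Spec_rank_ends ends shape (rank_ends ends shape)

-- ===== LEMMAS AND PROOFS =====

theorem foldl_min_keep {α : Type} (key : α → Int) (t : List α) (m : α)
    (h : ∀ y ∈ t, ¬ (key y < key m)) :
    t.foldl (fun acc x => match acc with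
      | none => some x
      | some m => if key x < key m then some x else some m) (some m) = some m := by
  induction t generalizing m with
  | nil => rfl
  | cons a t ih =>
    simp only [List.foldl_cons]
    rw [if_neg (h a (by simp))]
    exact ih m (fun y hy => h y (by simp [hy]))

theorem foldl_min_first {α : Type} (key : α → Int) (t : List α) (m : α) (k : Nat)
    (hk : k < t.length)
    (hmin : ∀ j (hj : j < t.length), key t[k] ≤ key t[j])
    (hfirst : ∀ j (hj : j < k), key t[k] < key t[j])
    (hm : key t[k] < key m) :
    t.foldl (fun acc x => match acc with
      | none => some x
      | some m => if key x < key m then some x else some m) (some m) = some t[k] := by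
  induction t generalizing m k with
  | nil => simp at hk
  | cons a t ih =>
    simp only [List.foldl_cons]
    cases k with
    | zero =>
      simp only [List.getElem_cons_zero] at hmin hfirst hm ⊢
      rw [if_pos hm]
      exact foldl_min_keep key t a (fun y hy => by
        obtain ⟨j, hj, rfl⟩ := List.mem_iff_getElem.1 hy
        have := hmin (j+1) (by simpa using hj)
        simpa using not_lt.2 this)
    | succ k =>
      have hk' : k < t.length := by simpa using hk
      simp only [List.getElem_cons_succ] at hmin hfirst hm ⊢
      have ha : key t[k] < key a := by simpa using hfirst 0 (Nat.succ_pos _)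
      split
      · exact ih a k hk' (fun j hj => by simpa using hmin (j+1) (by simpa using hj))
          (fun j hj => by simpa using hfirst (j+1) (Nat.succ_lt_succ hj)) ha
      · exact ih m k hk' (fun j hj => by simpa using hmin (j+1) (by simpa using hj))
          (fun j hj => by simpa using hfirst (j+1) (Nat.succ_lt_succ hj)) hm

theorem min?_first_spec {α : Type} (key : α → Int) (ps : List α) (k : Nat)
    (hk : k < ps.length)
    (hmin : ∀ j (hj : j < ps.length), key ps[k] ≤ key ps[j])
    (hfirst : ∀ j (hj : j < k), key ps[k] < key ps[j]) :
    PySem.List.min? ps key = some ps[k] := by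
  cases ps with
  | nil => simp at hk
  | cons a t =>
    show List.foldl _ (some a) t = _
    cases k with
    | zero =>
      simp only [List.getElem_cons_zero]
      exact foldl_min_keep key t a (fun y hy => by
        obtain ⟨j, hj, rfl⟩ := List.mem_iff_getElem.1 hy
        have := hmin (j+1) (by simpa using hj)
        simpa using not_lt.2 this)
    | succ k =>
      simp only [List.getElem_cons_succ]
      exact foldl_min_first key t a k (by simpa using hk)
        (fun j hj => by simpa using hmin (j+1) (by simpa using hj))
        (fun j hj => by simpa using hfirst (j+1) (by simpa using hj))
        (by simpa using hfirst 0 (Nat.succ_pos _))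

theorem foldl_max_keep {α : Type} (key : α → Int) (t : List α) (m : α)
    (h : ∀ y ∈ t, ¬ (key m < key y)) :
    t.foldl (fun acc x => match acc with
      | none => some x
      | some m => if key m < key x then some x else some m) (some m) = some m := by
  induction t generalizing m with
  | nil => rfl
  | cons a t ih =>
    simp only [List.foldl_cons]
    rw [if_neg (h a (by simp))]
    exact ih m (fun y hy => h y (by simp [hy]))

theorem foldl_max_first {α : Type} (key : α → Int) (t : List α) (m : α) (k : Nat)
    (hk : k < t.length)
    (hmin : ∀ j (hj : j < t.length), key t[j] ≤ key t[k])
    (hfirst : ∀ j (hj : j < k), key t[j] < key t[k])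
    (hm : key m < key t[k]) :
    t.foldl (fun acc x => match acc with
      | none => some x
      | some m => if key m < key x then some x else some m) (some m) = some t[k] := by
  induction t generalizing m k with
  | nil => simp at hk
  | cons a t ih =>
    simp only [List.foldl_cons]
    cases k with
    | zero =>
      simp only [List.getElem_cons_zero] at hmin hfirst hm ⊢
      rw [if_pos hm]
      exact foldl_max_keep key t a (fun y hy => by
        obtain ⟨j, hj, rfl⟩ := List.mem_iff_getElem.1 hy
        have := hmin (j+1) (by simpa using hj)
        simpa using not_lt.2 this)
    | succ k =>
      have hk' : k < t.length := by simpa using hk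
      simp only [List.getElem_cons_succ] at hmin hfirst hm ⊢
      have ha : key a < key t[k] := by simpa using hfirst 0 (Nat.succ_pos _)
      split
      · exact ih a k hk' (fun j hj => by simpa using hmin (j+1) (by simpa using hj))
          (fun j hj => by simpa using hfirst (j+1) (Nat.succ_lt_succ hj)) ha
      · exact ih m k hk' (fun j hj => by simpa using hmin (j+1) (by simpa using hj))
          (fun j hj => by simpa using hfirst (j+1) (Nat.succ_lt_succ hj)) hm

theorem max?_first_spec {α : Type} (key : α → Int) (ps : List α) (k : Nat)
    (hk : k < ps.length)
    (hmin : ∀ j (hj : j < ps.length), key ps[j] ≤ key ps[k])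
    (hfirst : ∀ j (hj : j < k), key ps[j] < key ps[k]) :
    PySem.List.max? ps key = some ps[k] := by
  cases ps with
  | nil => simp at hk
  | cons a t =>
    show List.foldl _ (some a) t = _
    cases k with
    | zero =>
      simp only [List.getElem_cons_zero]
      exact foldl_max_keep key t a (fun y hy => by
        obtain ⟨j, hj, rfl⟩ := List.mem_iff_getElem.1 hy
        have := hmin (j+1) (by simpa using hj)
        simpa using not_lt.2 this)
    | succ k =>
      simp only [List.getElem_cons_succ]
      exact foldl_max_first key t a k (by simpa using hk)
        (fun j hj => by simpa using hmin (j+1) (by simpa using hj))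
        (fun j hj => by simpa using hfirst (j+1) (by simpa using hj))
        (by simpa using hfirst 0 (Nat.succ_pos _))

theorem exists_first_min {α : Type} (key : α → Int) (ps : List α) (hne : ps ≠ []) :
    ∃ (k : Nat) (hk : k < ps.length), (∀ j (hj : j < ps.length), key ps[k] ≤ key ps[j]) ∧
      (∀ j (hj : j < k), key ps[k] < key ps[j]) := by
  induction ps with
  | nil => exact absurd rfl hne
  | cons a t ih =>
    cases t with
    | nil =>
      refine ⟨0, by simp, fun j hj => ?_, fun j hj => by omega⟩
      have : j = 0 := by simpa using hj
      subst this; simp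
    | cons b t' =>
      obtain ⟨k, hk, hmin, hfirst⟩ := ih (by simp)
      by_cases hcmp : key a ≤ key (b :: t')[k]
      · refine ⟨0, by simp, fun j hj => ?_, fun j hj => by omega⟩
        cases j with
        | zero => simp
        | succ j =>
          simp only [List.getElem_cons_zero, List.getElem_cons_succ]
          exact le_trans hcmp (hmin j (by simpa using hj))
      · push Not at hcmp
        refine ⟨k + 1, by simpa using Nat.succ_lt_succ hk, fun j hj => ?_, fun j hj => ?_⟩
        · cases j with
          | zero => simpa using le_of_lt hcmp
          | succ j => simpa using hmin j (by simpa using hj)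
        · cases j with
          | zero => simpa using hcmp
          | succ j => simpa using hfirst j (by simpa using hj)

theorem exists_first_max {α : Type} (key : α → Int) (ps : List α) (hne : ps ≠ []) :
    ∃ (k : Nat) (hk : k < ps.length), (∀ j (hj : j < ps.length), key ps[j] ≤ key ps[k]) ∧
      (∀ j (hj : j < k), key ps[j] < key ps[k]) := by
  induction ps with
  | nil => exact absurd rfl hne
  | cons a t ih =>
    cases t with
    | nil =>
      refine ⟨0, by simp, fun j hj => ?_, fun j hj => by omega⟩
      have : j = 0 := by simpa using hj
      subst this; simp
    | cons b t' =>
      obtain ⟨k, hk, hmax, hfirst⟩ := ih (by simp)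
      by_cases hcmp : key (b :: t')[k] ≤ key a
      · refine ⟨0, by simp, fun j hj => ?_, fun j hj => by omega⟩
        cases j with
        | zero => simp
        | succ j =>
          simp only [List.getElem_cons_zero, List.getElem_cons_succ]
          exact le_trans (hmax j (by simpa using hj)) hcmp
      · push Not at hcmp
        refine ⟨k + 1, by simpa using Nat.succ_lt_succ hk, fun j hj => ?_, fun j hj => ?_⟩
        · cases j with
          | zero => simpa using le_of_lt hcmp
          | succ j => simpa using hmax j (by simpa using hj)
        · cases j with
          | zero => simpa using hcmp
          | succ j => simpa using hfirst j (by simpa using hj)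

theorem index?_first {α : Type} [BEq α] [LawfulBEq α] (l : List α) (k : Nat) (hk : k < l.length)
    (hfirst : ∀ j (hj : j < k), l[j] ≠ l[k]) :
    PySem.List.index? l l[k] = some k := by
  rw [PySem.List.index?_eq_some_iff]
  refine ⟨l.take k, l.drop (k+1), ?_, by simp [hk.le], ?_⟩
  · conv_lhs => rw [← List.take_append_drop k l]
    rw [List.drop_eq_getElem_cons hk]
  · intro hmem
    obtain ⟨j, hj, hval⟩ := List.mem_iff_getElem.1 hmem
    have hjk : j < k := by simpa using (hj.trans_le (by simp))
    refine hfirst j hjk ?_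
    rw [← hval, List.getElem_take]

-- ----- the selection semantics A implements (also the middle layer of the proof) -----

def innerB (takeMin : Bool) : Nat → List (Int × Int) → List Int → Int → Int → Int →
    (List Int × Int × Int × Int)
  | 0, _, si, uy, dy, rem => (si, uy, dy, rem)
  | fuel+1, pairs, si, uy, dy, rem =>
    match (if takeMin then PySem.List.min? pairs (fun p => p.2) else PySem.List.max? pairs (fun p => p.2)) with
    | none => (si, uy, dy, rem)
    | some b =>
      let si' := si ++ [b.1]
      let uy' := if takeMin ∧ rem ≤ 2 then b.2 else uy
      let dy' := if (¬ takeMin) ∧ rem ≤ 2 then b.2 else dy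
      innerB (!takeMin) fuel ((PySem.List.remove? pairs b).getD []) si' uy' dy' (rem - 1)

def FIs (l : List Int) (s x : Int) : List Int :=
  ((PySem.List.enumerate l s).filter (fun p => decide (p.2 = x))).map (·.1)

def gstep (ends : List (List Int)) (width : Int) (xl : List Int)
    (st : List Int × Int × Int × Int) (x : Int) : List Int × Int × Int × Int :=
  let idxs := FIs xl 0 x
  if idxs.length = 1 then
    (st.1 ++ [PySem.List.pyGetD idxs (0:Int) 0], st.2.1, st.2.2.1, st.2.2.2 - 1)
  else
    let pairs := idxs.map (fun i => (i, PySem.List.pyGetD (PySem.List.pyGetD ends i []) (0:Int) 0))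
    let ys := pairs.map (fun p => p.2)
    match PySem.List.min? ys (fun y => y), PySem.List.max? ys (fun y => y) with
    | some mn, some mx =>
      innerB (decide (mn > width - mx - 1)) pairs.length pairs st.1 st.2.1 st.2.2.1 st.2.2.2
    | _, _ => st

theorem pick_corr {f : Int → Int} (useMin : Bool) (ix : List Int) (hnd : ix.Nodup) (hne : ix ≠ [])
    (sl si : List Int) (uy dy : Int) :
    ∃ (k : Nat) (hk : k < ix.length),
      pickA useMin ix (ix.map f) sl si uy dy =
        some (ix.eraseIdx k, (ix.eraseIdx k).map f, sl.tail,
              si ++ [ix[k]],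
              (if useMin ∧ sl.length ≤ 2 then f ix[k] else uy),
              (if (¬ useMin) ∧ sl.length ≤ 2 then f ix[k] else dy)) ∧
      (if useMin then PySem.List.min? (ix.map (fun i => (i, f i))) (fun p => p.2)
       else PySem.List.max? (ix.map (fun i => (i, f i))) (fun p => p.2)) = some (ix[k], f ix[k]) ∧
      (PySem.List.remove? (ix.map (fun i => (i, f i))) (ix[k], f ix[k])).getD []
        = (ix.eraseIdx k).map (fun i => (i, f i)) := by
  have hplen : (ix.map (fun i => (i, f i))).length = ix.length := by simp
  have hylen : (ix.map f).length = ix.length := by simp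
  have hkey : ∃ (k : Nat) (hk : k < ix.length),
      (if useMin then (∀ j (hj : j < ix.length), f ix[k] ≤ f ix[j]) ∧ (∀ j (hj : j < k), f ix[k] < f ix[j])
       else (∀ j (hj : j < ix.length), f ix[j] ≤ f ix[k]) ∧ (∀ j (hj : j < k), f ix[j] < f ix[k])) := by
    cases useMin with
    | false =>
      obtain ⟨k, hk, h1, h2⟩ := exists_first_max (fun y => y) (ix.map f) (by simpa using hne)
      refine ⟨k, by simpa using hk, ?_⟩
      simp only [Bool.false_eq_true, if_false]
      constructor
      · intro j hj
        have := h1 j (by simpa using hj)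
        simp only [List.getElem_map] at this; exact this
      · intro j hj; simpa using h2 j hj
    | true =>
      obtain ⟨k, hk, h1, h2⟩ := exists_first_min (fun y => y) (ix.map f) (by simpa using hne)
      refine ⟨k, by simpa using hk, ?_⟩
      simp only [if_true]
      constructor
      · intro j hj
        have := h1 j (by simpa using hj)
        simp only [List.getElem_map] at this; exact this
      · intro j hj; simpa using h2 j hj
  obtain ⟨k, hk, hkey⟩ := hkey
  refine ⟨k, hk, ?_⟩
  have hylk : (ix.map f)[k]'(by simpa using hk) = f ix[k] := by simp
  have hplk : (ix.map (fun i => (i, f i)))[k]'(by simpa using hk) = (ix[k], f ix[k]) := by simp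
  have hexty : (if useMin then PySem.List.min? (ix.map f) (fun y => y)
      else PySem.List.max? (ix.map f) (fun y => y)) = some (f ix[k]) := by
    cases useMin with
    | true =>
      simp only [if_true] at hkey ⊢
      rw [min?_first_spec (fun y => y) (ix.map f) k (by simpa using hk)
        (fun j hj => by simpa using hkey.1 j (by simpa using hj))
        (fun j hj => by simpa using hkey.2 j hj), hylk]
    | false =>
      simp only [Bool.false_eq_true, if_false] at hkey ⊢
      rw [max?_first_spec (fun y => y) (ix.map f) k (by simpa using hk)
        (fun j hj => by simpa using hkey.1 j (by simpa using hj))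
        (fun j hj => by simpa using hkey.2 j hj), hylk]
  have hextp : (if useMin then PySem.List.min? (ix.map (fun i => (i, f i))) (fun p => p.2)
       else PySem.List.max? (ix.map (fun i => (i, f i))) (fun p => p.2)) = some (ix[k], f ix[k]) := by
    cases useMin with
    | true =>
      simp only [if_true] at hkey ⊢
      rw [min?_first_spec (fun p => p.2) (ix.map (fun i => (i, f i))) k (by simpa using hk)
        (fun j hj => by simpa using hkey.1 j (by simpa using hj))
        (fun j hj => by simpa using hkey.2 j hj), hplk]
    | false =>
      simp only [Bool.false_eq_true, if_false] at hkey ⊢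
      rw [max?_first_spec (fun p => p.2) (ix.map (fun i => (i, f i))) k (by simpa using hk)
        (fun j hj => by simpa using hkey.1 j (by simpa using hj))
        (fun j hj => by simpa using hkey.2 j hj), hplk]
  have hstrict : ∀ j (hj : j < k), f ix[j] ≠ f ix[k] := by
    cases useMin with
    | true => simp only [if_true] at hkey; exact fun j hj => (ne_of_gt (hkey.2 j hj))
    | false => simp only [Bool.false_eq_true, if_false] at hkey; exact fun j hj => (ne_of_lt (hkey.2 j hj))
  have hidxy : PySem.List.index? (ix.map f) (f ix[k]) = some k := by
    have := index?_first (ix.map f) k (by simpa using hk)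
      (fun j hj => by
        simp only [List.getElem_map]
        exact hstrict j hj)
    rwa [hylk] at this
  have hidxp : PySem.List.index? (ix.map (fun i => (i, f i))) (ix[k], f ix[k]) = some k := by
    have := index?_first (ix.map (fun i => (i, f i))) k (by simpa using hk)
      (fun j hj => by
        simp only [List.getElem_map, ne_eq, Prod.mk.injEq, not_and]
        intro hfst
        exact absurd (hnd.getElem_inj_iff.mp hfst) (Nat.ne_of_lt hj))
    rwa [hplk] at this
  refine ⟨?_, hextp, ?_⟩
  · unfold pickA
    rw [hexty]
    dsimp only
    rw [hidxy]
    dsimp only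
    have hg : PySem.List.pyGetD ix (k : Int) 0 = ix[k] := by
      rw [PySem.List.pyGetD_natCast, List.getD_eq_getElem?_getD, List.getElem?_eq_getElem hk]
      rfl
    simp only [hg, List.eraseIdx_map]
  · unfold PySem.List.remove?
    have : List.idxOf? (ix[k], f ix[k]) (ix.map (fun i => (i, f i))) = some k := by
      rw [← PySem.List.index?_eq_idxOf?] at *
      exact hidxp
    rw [this]
    simp [List.eraseIdx_map]

theorem innerB_nil (mf : Bool) (fb : Nat) (si : List Int) (uy dy rem : Int) :
    innerB mf fb [] si uy dy rem = (si, uy, dy, rem) := by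
  cases fb with
  | zero => rfl
  | succ fb => cases mf <;> simp [innerB, PySem.List.min?, PySem.List.max?]

theorem inner_corr (f : Int → Int) (mf : Bool) :
    ∀ (fa : Nat) (ix : List Int) (fb : Nat) (sl si : List Int) (uy dy : Int),
    ix.Nodup → ix.length ≤ fa → ix.length ≤ fb → ix.length ≤ sl.length →
    innerA mf fa ix (ix.map f) sl si uy dy =
      (let r := innerB mf fb (ix.map (fun i => (i, f i))) si uy dy (sl.length : Int);
       (r.1, r.2.1, r.2.2.1, sl.drop ix.length)) ∧
    (innerB mf fb (ix.map (fun i => (i, f i))) si uy dy (sl.length : Int)).2.2.2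
      = (sl.length : Int) - ix.length := by
  intro fa
  induction fa with
  | zero =>
    intro ix fb sl si uy dy hnd hfa hfb hsl
    have : ix = [] := List.length_eq_zero_iff.mp (Nat.le_zero.mp hfa)
    subst this
    simp [innerA, innerB_nil]
  | succ fa ih =>
    intro ix fb sl si uy dy hnd hfa hfb hsl
    by_cases hne : ix = []
    · subst hne
      simp [innerA, innerB_nil]
    · obtain ⟨k, hk, hpick, hextp, hrem⟩ := pick_corr (f := f) mf ix hnd hne sl si uy dy
      have hslne : sl ≠ [] := by
        cases sl
        · simp only [List.length_nil, Nat.le_zero, List.length_eq_zero_iff] at hsl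
          exact absurd hsl hne
        · simp
      obtain ⟨fb', rfl⟩ : ∃ fb', fb = fb' + 1 := by
        cases fb
        · exact absurd (List.length_eq_zero_iff.mp (Nat.le_zero.mp hfb)) hne
        · exact ⟨_, rfl⟩
      rw [show innerA mf (fa+1) ix (ix.map f) sl si uy dy =
        (if ix = [] then ((si, uy, dy, sl) : List Int × Int × Int × List Int) else
          match pickA mf ix (ix.map f) sl si uy dy with
          | none => (si, uy, dy, sl)
          | some (ix2, yl, sl', si', uy', dy') =>
            if ix2 = [] then (si', uy', dy', sl') else
            match pickA (!mf) ix2 yl sl' si' uy' dy' with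
            | none => (si', uy', dy', sl')
            | some (ix3, yl2, sl2, si2, uy2, dy2) => innerA mf fa ix3 yl2 sl2 si2 uy2 dy2) from rfl]
      rw [if_neg hne, hpick]
      rw [show innerB mf (fb'+1) (ix.map (fun i => (i, f i))) si uy dy (sl.length : Int) =
        (match (if mf then PySem.List.min? (ix.map (fun i => (i, f i))) (fun p => p.2)
               else PySem.List.max? (ix.map (fun i => (i, f i))) (fun p => p.2)) with
         | none => (si, uy, dy, (sl.length : Int))
         | some b =>
            innerB (!mf) fb' ((PySem.List.remove? (ix.map (fun i => (i, f i))) b).getD [])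
              (si ++ [b.1])
              (if mf ∧ (sl.length : Int) ≤ 2 then b.2 else uy)
              (if (¬ mf) ∧ (sl.length : Int) ≤ 2 then b.2 else dy)
              ((sl.length : Int) - 1)) from rfl]
      rw [hextp]
      dsimp only
      rw [hrem]
      have hcast : ((sl.length : Int) ≤ 2) = (sl.length ≤ 2) := by
        apply propext; omega
      simp only [hcast]
      have hnd' : (ix.eraseIdx k).Nodup := hnd.eraseIdx k
      have hlen' : (ix.eraseIdx k).length = ix.length - 1 := by
        rw [List.length_eraseIdx]; simp [hk]
      by_cases hsplit : ix.eraseIdx k = []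
      · have hone : ix.length = 1 := by
          have := hlen' ▸ (List.length_eq_zero_iff.mpr hsplit)
          omega
        rw [if_pos hsplit, hsplit]
        simp only [List.map_nil, innerB_nil]
        refine ⟨?_, by rw [hone]; ring⟩
        simp [hone, List.drop_one]
      · rw [if_neg hsplit]
        have htwo : 2 ≤ ix.length := by
          have h0 : 0 < (ix.eraseIdx k).length := List.length_pos_iff.mpr hsplit
          omega
        obtain ⟨k2, hk2, hpick2, hextp2, hrem2⟩ :=
          pick_corr (f := f) (!mf) (ix.eraseIdx k) hnd' hsplit sl.tail
            (si ++ [ix[k]])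
            (if mf ∧ sl.length ≤ 2 then f ix[k] else uy)
            (if (¬ mf) ∧ sl.length ≤ 2 then f ix[k] else dy)
        rw [hpick2]
        obtain ⟨fb'', rfl⟩ : ∃ fb'', fb' = fb'' + 1 := by
          cases fb'
          · exfalso; omega
          · exact ⟨_, rfl⟩
        rw [show ∀ (ps : List (Int × Int)) (si : List Int) (uy dy rem : Int),
            innerB (!mf) (fb''+1) ps si uy dy rem =
            (match (if (!mf) then PySem.List.min? ps (fun p => p.2)
                   else PySem.List.max? ps (fun p => p.2)) with
             | none => (si, uy, dy, rem)
             | some b =>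
                innerB (!(!mf)) fb'' ((PySem.List.remove? ps b).getD [])
                  (si ++ [b.1])
                  (if (!mf) ∧ rem ≤ 2 then b.2 else uy)
                  (if (¬ (!mf)) ∧ rem ≤ 2 then b.2 else dy)
                  (rem - 1)) from fun ps si uy dy rem => rfl]
        rw [hextp2]
        dsimp only
        rw [hrem2]
        simp only [Bool.not_not]
        have hslen1 : 1 ≤ sl.length := le_trans (by omega) hsl
        have e2 : ((sl.length : Int) - 1 ≤ 2) = (sl.tail.length ≤ 2) := by
          apply propext; rw [List.length_tail]; omega
        simp only [e2]
        have hnd2 : ((ix.eraseIdx k).eraseIdx k2).Nodup := hnd'.eraseIdx k2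
        have hlen2 : ((ix.eraseIdx k).eraseIdx k2).length = ix.length - 2 := by
          rw [List.length_eraseIdx, if_pos hk2, hlen']; omega
        have hr : ((sl.tail.tail.length : Nat) : Int) = (sl.length : Int) - 1 - 1 := by
          simp only [List.length_tail]; omega
        rw [← hr]
        have hd : List.drop ix.length sl = List.drop ((ix.eraseIdx k).eraseIdx k2).length sl.tail.tail := by
          rw [hlen2, ← List.drop_one, ← List.drop_one, List.drop_drop, List.drop_drop]
          congr 1
          omega
        rw [hd]
        have hfinal : (sl.length : Int) - (ix.length : Int)
            = ((sl.tail.tail.length : Nat) : Int) - (((ix.eraseIdx k).eraseIdx k2).length : Int) := by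
          simp only [List.length_tail, hlen2]; omega
        rw [hfinal]
        exact ih _ fb'' sl.tail.tail _ _ _ hnd2 (by rw [hlen2]; omega) (by rw [hlen2]; omega)
          (by rw [hlen2]; simp only [List.length_tail]; omega)

theorem FIs_nil (s x : Int) : FIs [] s x = [] := rfl

theorem FIs_cons (a : Int) (t : List Int) (s x : Int) :
    FIs (a :: t) s x = (if a = x then [s] else []) ++ FIs t (s+1) x := by
  by_cases h : a = x <;> simp [FIs, PySem.List.enumerate_cons, h]

theorem foldl_collect (x : Int) (L : List (Int × Int)) (acc : List Int) :
    L.foldl (fun acc p => if p.2 = x then acc ++ [p.1] else acc) acc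
      = acc ++ (L.filter (fun p => decide (p.2 = x))).map (·.1) := by
  induction L generalizing acc with
  | nil => simp
  | cons a t ih => by_cases h : a.2 = x <;> simp [h, ih]

theorem find_indices_eq (l : List Int) (x : Int) : find_indices l x = FIs l 0 x := by
  unfold find_indices FIs
  rw [foldl_collect]
  simp

theorem FIs_length (l : List Int) (x : Int) : ∀ s, (FIs l s x).length = l.count x := by
  induction l with
  | nil => intro s; simp [FIs_nil]
  | cons a t ih =>
    intro s
    rw [FIs_cons, List.count_cons]
    by_cases h : a = x <;> simp [h, ih]

theorem FIs_ge (l : List Int) (x : Int) : ∀ s, ∀ j ∈ FIs l s x, s ≤ j := by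
  induction l with
  | nil => intro s j hj; simp [FIs_nil] at hj
  | cons a t ih =>
    intro s j hj
    rw [FIs_cons] at hj
    rcases List.mem_append.1 hj with h | h
    · by_cases ha : a = x <;> simp [ha] at h
      omega
    · have := ih (s+1) j h
      omega

theorem FIs_pairwise (l : List Int) (x : Int) : ∀ s, (FIs l s x).Pairwise (· < ·) := by
  induction l with
  | nil => intro s; simp [FIs_nil]
  | cons a t ih =>
    intro s
    rw [FIs_cons]
    apply List.pairwise_append.2
    refine ⟨by by_cases h : a = x <;> simp [h], ih (s+1), ?_⟩
    intro j hj j' hj'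
    by_cases h : a = x <;> simp [h] at hj
    subst hj
    have := FIs_ge t x _ j' hj'
    omega

theorem FIs_nodup (l : List Int) (s x : Int) : (FIs l s x).Nodup :=
  (FIs_pairwise l x s).imp (fun h => ne_of_lt h)

theorem FIs_head (l : List Int) (x : Int) (hm : x ∈ l) :
    ∀ s, ∃ t', FIs l s x = (s + (l.idxOf x : Int)) :: t' := by
  induction l with
  | nil => simp at hm
  | cons a t ih =>
    intro s
    by_cases h : a = x
    · subst h
      rw [FIs_cons, if_pos rfl, List.idxOf_cons_self]
      exact ⟨FIs t (s+1) a, by simp⟩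
    · have hmt : x ∈ t := by
        rcases List.mem_cons.1 hm with h' | h'
        · exact absurd h'.symm h
        · exact h'
      obtain ⟨t', ht'⟩ := ih hmt (s+1)
      rw [FIs_cons, if_neg h, List.idxOf_cons_ne _ (by exact h)]
      refine ⟨t', ?_⟩
      simp only [List.nil_append, ht']
      congr 1
      push_cast
      ring

theorem count_flatMap_replicate (c : Int → Nat) (v : Int) :
    ∀ (L : List Int), L.Nodup →
      (L.flatMap (fun d => List.replicate (c d) d)).count v = if v ∈ L then c v else 0 := by
  intro L
  induction L with
  | nil => simp
  | cons a t ih =>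
    intro hnd
    rw [List.flatMap_cons, List.count_append, List.count_replicate, ih hnd.of_cons]
    by_cases hav : v = a
    · subst hav
      have : v ∉ t := (List.nodup_cons.1 hnd).1
      simp [this]
    · simp [hav, Ne.symm hav]

theorem pairwise_flatMap_replicate (c : Int → Nat) :
    ∀ (L : List Int), L.Pairwise (· < ·) →
      (L.flatMap (fun d => List.replicate (c d) d)).Pairwise (· ≤ ·) := by
  intro L
  induction L with
  | nil => simp
  | cons a t ih =>
    intro hp
    rw [List.flatMap_cons]
    apply List.pairwise_append.2
    refine ⟨?_, ih hp.of_cons, ?_⟩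
    · rcases List.pairwise_replicate.mpr (Or.inr (le_refl a)) with h
      exact h
    · intro u hu w hw
      have hua : u = a := List.eq_of_mem_replicate hu
      obtain ⟨d, hd, hwd⟩ := List.mem_flatMap.1 hw
      have hwd' : w = d := List.eq_of_mem_replicate hwd
      rw [hua, hwd']
      exact le_of_lt ((List.pairwise_cons.1 hp).1 d hd)

theorem sorted_blocks (l : List Int) :
    PySem.List.sorted l (fun x => x) false
      = (PySem.List.sorted (PySem.Set.ofList l) (fun x => x) false).flatMap
          (fun d => List.replicate (l.count d) d) := by
  have hndS : (PySem.List.sorted (PySem.Set.ofList l) (fun x => x) false).Nodup :=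
    (PySem.List.sorted_perm (PySem.Set.ofList l) (fun x => x) false).symm.nodup
      (PySem.Set.nodup_ofList l)
  apply PySem.List.sorted_id_eq_of_perm_of_pairwise
  · apply List.perm_iff_count.2
    intro v
    rw [count_flatMap_replicate _ v _ hndS]
    by_cases hv : v ∈ l
    · simp [PySem.List.mem_sorted, PySem.Set.mem_ofList, hv]
    · simp [PySem.List.mem_sorted, PySem.Set.mem_ofList, hv, List.count_eq_zero.2 hv]
  · exact pairwise_flatMap_replicate _ _ (PySem.List.sorted_ofList_pairwise_lt l)

theorem idxOf?_of_mem (l : List Int) (d : Int) (h : d ∈ l) :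
    PySem.List.index? l d = some (l.idxOf d) := by
  rw [PySem.List.index?_eq_idxOf?]
  induction l with
  | nil => simp at h
  | cons a t ih =>
    by_cases ha : a = d
    · subst ha; simp [List.idxOf?_cons]
    · have hdt : d ∈ t := by
        rcases List.mem_cons.1 h with h' | h'
        · exact absurd h'.symm ha
        · exact h'
      simp [List.idxOf?_cons, ha, ih hdt]

-- A's outer loop computes the fold of gstep over the distinct x values
theorem outer_corr (ends : List (List Int)) (width : Int) (xl : List Int) :
    ∀ (L : List Int) (fuel : Nat) (si : List Int) (uy dy : Int),
      L.Pairwise (· < ·) → (∀ d ∈ L, d ∈ xl) →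
      (L.flatMap (fun d => List.replicate (xl.count d) d)).length ≤ fuel →
      outerA ends xl width fuel (L.flatMap (fun d => List.replicate (xl.count d) d)) si uy dy
        = (let st := L.foldl (gstep ends width xl)
             (si, uy, dy, ((L.flatMap (fun d => List.replicate (xl.count d) d)).length : Int));
           (st.1, st.2.1, st.2.2.1)) := by
  intro L
  induction L with
  | nil =>
    intro fuel si uy dy _ _ _
    cases fuel <;> rfl
  | cons d L' ih =>
    intro fuel si uy dy hpw hmem hfuel
    have hdx : d ∈ xl := hmem d (by simp)
    have hm1 : 1 ≤ xl.count d := List.count_pos_iff.2 hdx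
    have hrest0 : (L'.flatMap (fun e => List.replicate (xl.count e) e)).count d = 0 := by
      apply List.count_eq_zero.2
      intro hc
      obtain ⟨e, he, hce⟩ := List.mem_flatMap.1 hc
      have : d = e := List.eq_of_mem_replicate hce
      subst this
      exact absurd ((List.pairwise_cons.1 hpw).1 d he) (lt_irrefl d)
    set rest := L'.flatMap (fun e => List.replicate (xl.count e) e) with hrest
    have hsl : (d :: L').flatMap (fun e => List.replicate (xl.count e) e)
        = List.replicate (xl.count d) d ++ rest := by rw [List.flatMap_cons]
    obtain ⟨m', hm'⟩ : ∃ m', xl.count d = m' + 1 := ⟨xl.count d - 1, by omega⟩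
    have hcons : (d :: L').flatMap (fun e => List.replicate (xl.count e) e)
        = d :: (List.replicate m' d ++ rest) := by
      rw [hsl, hm', List.replicate_succ]; rfl
    have hslcount : (d :: (List.replicate m' d ++ rest)).count d = xl.count d := by
      simp [List.count_cons_self, List.count_append, hrest0, hm']
    have hsllen : (d :: (List.replicate m' d ++ rest)).length = xl.count d + rest.length := by
      simp [hm']; omega
    rw [hcons] at hfuel ⊢
    obtain ⟨fuel', rfl⟩ : ∃ f', fuel = f' + 1 := by
      cases fuel
      · simp at hfuel
      · exact ⟨_, rfl⟩
    rw [show outerA ends xl width (fuel' + 1) (d :: (List.replicate m' d ++ rest)) si uy dy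
      = (if PySem.List.count (d :: (List.replicate m' d ++ rest)) d = 1 then
          outerA ends xl width fuel' (d :: (List.replicate m' d ++ rest)).tail
            (si ++ [(((PySem.List.index? xl d).getD 0 : Nat) : Int)]) uy dy
        else
          (let indexes := find_indices xl d
           let y_locs := indexes.foldl
             (fun acc i => acc ++ [PySem.List.pyGetD (PySem.List.pyGetD ends i []) (0:Int) 0]) []
           match PySem.List.min? y_locs (fun y => y), PySem.List.max? y_locs (fun y => y) with
           | some mn, some mx =>
             let r := innerA (decide (mn > width - mx - 1)) indexes.length indexes y_locs
               (d :: (List.replicate m' d ++ rest)) si uy dy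
             outerA ends xl width fuel' r.2.2.2 r.1 r.2.1 r.2.2.1
           | _, _ => (si, uy, dy))) from rfl]
    rw [List.foldl_cons]
    have hcnt : PySem.List.count (d :: (List.replicate m' d ++ rest)) d = xl.count d := by
      rw [PySem.List.count_eq]
      exact hslcount
    have hfi_len : (FIs xl 0 d).length = xl.count d := FIs_length xl d 0
    by_cases hone : xl.count d = 1
    · rw [if_pos (by rw [hcnt, hone])]
      have hm0 : m' = 0 := by omega
      subst hm0
      obtain ⟨t', ht'⟩ := FIs_head xl d hdx 0
      have ht'nil : t' = [] := by
        have := hfi_len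
        rw [ht', hone] at this
        simpa using this
      rw [ht'nil] at ht'
      have hb : gstep ends width xl (si, uy, dy,
          ((d :: (List.replicate 0 d ++ rest)).length : Int)) d
          = (si ++ [((xl.idxOf d : Nat) : Int)], uy, dy,
             ((d :: (List.replicate 0 d ++ rest)).length : Int) - 1) := by
        unfold gstep
        rw [ht']
        simp
      rw [hb]
      rw [idxOf?_of_mem xl d hdx]
      have htail : (d :: (List.replicate 0 d ++ rest)).tail = rest := by simp
      rw [htail]
      have hlen4 : ((d :: (List.replicate 0 d ++ rest)).length : Int) - 1 = (rest.length : Int) := by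
        simp
      rw [hlen4]
      exact ih fuel' (si ++ [((xl.idxOf d : Nat) : Int)]) uy dy hpw.of_cons
        (fun e he => hmem e (by simp [he])) (by simp at hfuel ⊢; omega)
    · rw [if_neg (by rw [hcnt]; exact hone)]
      have htwo : 2 ≤ xl.count d := by omega
      rw [find_indices_eq]
      dsimp only
      rw [PySem.List.foldl_append_singleton_eq_map
        (fun i => PySem.List.pyGetD (PySem.List.pyGetD ends i []) (0:Int) 0) (FIs xl 0 d) []]
      rw [List.nil_append]
      have hixne : FIs xl 0 d ≠ [] := by
        intro hc
        rw [hc] at hfi_len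
        simp at hfi_len
        omega
      have hmapne : (FIs xl 0 d).map
          (fun i => PySem.List.pyGetD (PySem.List.pyGetD ends i []) (0:Int) 0) ≠ [] := by
        simpa using hixne
      obtain ⟨mn, hmn⟩ : ∃ mn, PySem.List.min? ((FIs xl 0 d).map
          (fun i => PySem.List.pyGetD (PySem.List.pyGetD ends i []) (0:Int) 0)) (fun y => y) = some mn := by
        cases hc : PySem.List.min? ((FIs xl 0 d).map
            (fun i => PySem.List.pyGetD (PySem.List.pyGetD ends i []) (0:Int) 0)) (fun y => y) with
        | none => exact absurd ((PySem.List.min?_eq_none_iff _ _).1 hc) hmapne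
        | some mn => exact ⟨mn, rfl⟩
      obtain ⟨mx, hmx⟩ : ∃ mx, PySem.List.max? ((FIs xl 0 d).map
          (fun i => PySem.List.pyGetD (PySem.List.pyGetD ends i []) (0:Int) 0)) (fun y => y) = some mx := by
        cases hc : PySem.List.max? ((FIs xl 0 d).map
            (fun i => PySem.List.pyGetD (PySem.List.pyGetD ends i []) (0:Int) 0)) (fun y => y) with
        | none => exact absurd ((PySem.List.max?_eq_none_iff _ _).1 hc) hmapne
        | some mx => exact ⟨mx, rfl⟩
      rw [hmn, hmx]
      dsimp only
      have hixsl : (FIs xl 0 d).length ≤ (d :: (List.replicate m' d ++ rest)).length := by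
        rw [hfi_len, hsllen]
        omega
      obtain ⟨h1, h2⟩ := inner_corr
        (fun i => PySem.List.pyGetD (PySem.List.pyGetD ends i []) (0:Int) 0)
        (decide (mn > width - mx - 1)) (FIs xl 0 d).length (FIs xl 0 d) (FIs xl 0 d).length
        (d :: (List.replicate m' d ++ rest)) si uy dy
        (FIs_nodup xl 0 d) le_rfl le_rfl hixsl
      rw [h1]
      dsimp only
      have hb : gstep ends width xl (si, uy, dy,
          ((d :: (List.replicate m' d ++ rest)).length : Int)) d
          = innerB (decide (mn > width - mx - 1)) (FIs xl 0 d).length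
              ((FIs xl 0 d).map (fun i => (i, PySem.List.pyGetD (PySem.List.pyGetD ends i []) (0:Int) 0)))
              si uy dy ((d :: (List.replicate m' d ++ rest)).length : Int) := by
        unfold gstep
        rw [if_neg (by rw [hfi_len]; exact hone)]
        dsimp only
        rw [List.map_map]
        rw [show ((fun p : Int × Int => p.2) ∘
            (fun i => (i, PySem.List.pyGetD (PySem.List.pyGetD ends i []) (0:Int) 0)))
          = (fun i => PySem.List.pyGetD (PySem.List.pyGetD ends i []) (0:Int) 0) from rfl]
        rw [hmn, hmx]
        dsimp only
        rw [List.length_map]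
      rw [hb]
      set X := innerB (decide (mn > width - mx - 1)) (FIs xl 0 d).length
          ((FIs xl 0 d).map (fun i => (i, PySem.List.pyGetD (PySem.List.pyGetD ends i []) (0:Int) 0)))
          si uy dy ((d :: (List.replicate m' d ++ rest)).length : Int) with hX
      have hXeta : X = (X.1, X.2.1, X.2.2.1, X.2.2.2) := rfl
      have hX4 : X.2.2.2 = (rest.length : Int) := by
        rw [h2, hfi_len]
        rw [hsllen]
        push_cast
        ring
      have hdrop : List.drop (FIs xl 0 d).length (d :: (List.replicate m' d ++ rest)) = rest := by
        rw [hfi_len, hm', List.drop_succ_cons]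
        rw [List.drop_append_of_le_length (by simp), List.drop_replicate]
        simp
      rw [hdrop]
      rw [hXeta, hX4]
      exact ih fuel' X.1 X.2.1 X.2.2.1 hpw.of_cons
        (fun e he => hmem e (by simp [he]))
        (by simp at hfuel ⊢; omega)

-- ----- B-side lemmas: stable sort as a lexicographic sort, runs, two pointers -----

def LexK (key : Int → Int) (a b : Int) : Prop :=
  key a < key b ∨ (key a = key b ∧ a < b)

theorem lexK_ne {key : Int → Int} {a b : Int} (h : LexK key a b) : a ≠ b := by
  rcases h with h | ⟨_, h⟩ <;> intro hab <;> subst hab <;> omega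

theorem insertBy_lex (key : Int → Int) (x : Int) (acc : List Int)
    (hacc : acc.Pairwise (LexK key)) (hlt : ∀ y ∈ acc, y < x) :
    (PySem.List.insertBy (fun a b => decide (key a < key b)) x acc).Pairwise (LexK key) := by
  induction acc with
  | nil => simp [PySem.List.insertBy]
  | cons y t ih =>
    rw [PySem.List.insertBy]
    by_cases hxy : key x < key y
    · rw [if_pos (by simpa using hxy)]
      refine List.pairwise_cons.2 ⟨?_, hacc⟩
      intro z hz
      rcases List.mem_cons.1 hz with rfl | hz'
      · exact Or.inl hxy
      · have hyz : LexK key y z := (List.pairwise_cons.1 hacc).1 z hz'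
        left
        rcases hyz with h | ⟨h, _⟩ <;> omega
    · rw [if_neg (by simpa using hxy)]
      refine List.pairwise_cons.2 ⟨?_, ih hacc.of_cons (fun z hz => hlt z (by simp [hz]))⟩
      intro z hz
      rcases (PySem.List.mem_insertBy _ _ _ _).1 hz with rfl | hz'
      · by_cases heq : key y = key z
        · exact Or.inr ⟨heq, hlt y (by simp)⟩
        · left; omega
      · exact (List.pairwise_cons.1 hacc).1 z hz'

theorem sorted_lex (key : Int → Int) (xs : List Int) (hxs : xs.Pairwise (· < ·)) :
    (PySem.List.sorted xs key false).Pairwise (LexK key) := by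
  rw [PySem.List.sorted_eq_foldl_insertBy]
  suffices h : ∀ (acc : List Int), acc.Pairwise (LexK key) → (∀ a ∈ acc, ∀ b ∈ xs, a < b) →
      (xs.foldl (fun acc x => PySem.List.insertBy (fun a b => decide (key a < key b)) x acc) acc).Pairwise (LexK key) by
    exact h [] (by simp) (by simp)
  induction xs with
  | nil => intro acc hacc _; simpa using hacc
  | cons x t ih =>
    intro acc hacc hlt
    simp only [List.foldl_cons]
    refine ih hxs.of_cons _ (insertBy_lex key x acc hacc (fun y hy => hlt y hy x (by simp))) ?_
    intro a ha b hb
    rcases (PySem.List.mem_insertBy _ _ _ _).1 ha with rfl | ha'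
    · exact (List.pairwise_cons.1 hxs).1 b hb
    · exact hlt a ha' b (by simp [hb])

theorem sorted_lex_eq (key : Int → Int) (xs ys : List Int) (hxs : xs.Pairwise (· < ·))
    (hperm : ys.Perm xs) (hys : ys.Pairwise (LexK key)) :
    PySem.List.sorted xs key false = ys := by
  refine List.eq_of_perm_of_sorted ?_ (sorted_lex key xs hxs) hys
    ((PySem.List.sorted_perm xs key false).trans hperm.symm)
  intro a b _ _ h1 h2
  rcases h1 with h | ⟨h, h'⟩ <;> rcases h2 with g | ⟨g, g'⟩ <;> omega

theorem mem_FIs (l : List Int) (x i : Int) :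
    ∀ s, i ∈ FIs l s x ↔ ∃ (k : Nat) (hk : k < l.length), i = s + k ∧ l[k] = x := by
  induction l with
  | nil => intro s; simp [FIs_nil]
  | cons a t ih =>
    intro s
    rw [FIs_cons]
    constructor
    · intro h
      rcases List.mem_append.1 h with h | h
      · by_cases ha : a = x <;> simp [ha] at h
        exact ⟨0, by simp, by simpa using h, by simpa using ha⟩
      · obtain ⟨k, hk, hik, hlk⟩ := (ih (s+1)).1 h
        exact ⟨k+1, by simpa using Nat.succ_lt_succ hk, by push_cast at hik ⊢; omega,
          by simpa using hlk⟩
    · rintro ⟨k, hk, hik, hlk⟩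
      cases k with
      | zero =>
        apply List.mem_append.2 (Or.inl _)
        simp only [List.getElem_cons_zero] at hlk
        simp [hlk, hik]
      | succ k =>
        apply List.mem_append.2 (Or.inr _)
        refine (ih (s+1)).2 ⟨k, by simpa using hk, by push_cast at hik ⊢; omega,
          by simpa using hlk⟩

theorem xkey_of_mem_FIs (ends : List (List Int)) (d i : Int)
    (h : i ∈ FIs (ends.map (fun e => PySem.List.pyGetD e (1:Int) 0)) 0 d) :
    xkeyB ends i = d := by
  obtain ⟨k, hk, hik, hlk⟩ := (mem_FIs _ d i 0).1 h
  have hk' : k < ends.length := by simpa using hk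
  subst hik
  unfold xkeyB
  rw [zero_add, PySem.List.pyGetD_natCast, List.getD_eq_getElem?_getD,
    List.getElem?_eq_getElem hk', Option.getD_some]
  simpa using hlk

theorem takeWhile_append_all (p : Int → Bool) (A B : List Int)
    (hA : ∀ a ∈ A, p a = true) (hB : ∀ h : B ≠ [], p (B.head h) = false) :
    (A ++ B).takeWhile p = A ∧ (A ++ B).dropWhile p = B := by
  induction A with
  | nil =>
    cases B with
    | nil => simp
    | cons b B' =>
      have := hB (by simp)
      simp only [List.head_cons] at this
      simp [List.takeWhile_cons, List.dropWhile_cons, this]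
  | cons a A' ih =>
    have ha := hA a (by simp)
    obtain ⟨h1, h2⟩ := ih (fun x hx => hA x (by simp [hx]))
    simp [List.takeWhile_cons, List.dropWhile_cons, ha, h1, h2]

theorem skipPtr_spec (arr : List Int) (T : PySem.Set Int) (j : Nat) (hj : j < arr.length) :
    ∀ (fuel lo : Nat), lo ≤ j → j - lo ≤ fuel →
    (∀ j' (h1 : lo ≤ j') (h2 : j' < j), arr[j']'(by omega) ∈ T) →
    arr[j] ∉ T →
    skipPtr arr T fuel lo = j := by
  intro fuel
  induction fuel with
  | zero =>
    intro lo h1 h2 _ hfree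
    have : lo = j := by omega
    subst this
    rw [skipPtr]
  | succ f ih =>
    intro lo hlo hfuel htaken hfree
    rw [skipPtr]
    have hget : ∀ (h : lo < arr.length), PySem.List.pyGetD arr (lo : Int) 0 = arr[lo] := by
      intro h
      rw [PySem.List.pyGetD_natCast, List.getD_eq_getElem?_getD, List.getElem?_eq_getElem h]
      rfl
    by_cases hcase : lo = j
    · subst hcase
      rw [hget hj]
      rw [if_neg (by simpa [PySem.Set.contains_iff] using hfree)]
    · have hlt : lo < j := by omega
      have hmem : arr[lo]'(by omega) ∈ T := htaken lo le_rfl hlt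
      rw [hget (by omega)]
      rw [if_pos (by simpa [PySem.Set.contains_iff] using hmem)]
      exact ih (lo+1) (by omega) (by omega) (fun j' a b => htaken j' (by omega) b) hfree

-- the first untaken element of the lex-sorted list is the first extremal remaining element
theorem min_pick (ykey : Int → Int) (run asc : List Int) (hrun : run.Pairwise (· < ·))
    (hasc : asc.Pairwise (LexK ykey)) (hperm : asc.Perm run)
    (T : PySem.Set Int) (j : Nat) (hj : j < asc.length)
    (hjtaken : ∀ j' (h : j' < j), asc[j']'(by omega) ∈ T) (hjfree : asc[j] ∉ T) :
    PySem.List.min? ((run.filter (fun i => !(PySem.Set.contains T i))).map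
        (fun i => (i, ykey i))) (fun p => p.2)
      = some (asc[j], ykey (asc[j])) := by
  set e := asc[j] with he
  set R := run.filter (fun i => !(PySem.Set.contains T i)) with hR
  have hascnd : asc.Nodup := hasc.imp lexK_ne
  have hRpw : R.Pairwise (· < ·) := hrun.filter _
  have hRnd : R.Nodup := hRpw.imp (fun h => ne_of_lt h)
  have hmemR : ∀ r, r ∈ R ↔ r ∈ run ∧ r ∉ T := by
    intro r
    rw [hR, List.mem_filter]
    simp [PySem.Set.contains_iff]
  have heR : e ∈ R := by
    rw [hmemR]
    exact ⟨hperm.mem_iff.1 (by simp [he]), hjfree⟩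
  have hfact : ∀ r ∈ R, r ≠ e → ykey e < ykey r ∨ (ykey e = ykey r ∧ e < r) := by
    intro r hr hne
    have hrasc : r ∈ asc := hperm.mem_iff.2 ((hmemR r).1 hr).1
    obtain ⟨jr, hjr, hjre⟩ := List.mem_iff_getElem.1 hrasc
    have hjrj : j < jr := by
      rcases Nat.lt_trichotomy jr j with h | h | h
      · exact absurd (hjre ▸ hjtaken jr h) ((hmemR r).1 hr).2
      · exact absurd (by subst h; rw [he, hjre]) hne
      · exact h
    have := List.pairwise_iff_getElem.1 hasc j jr hj hjr hjrj
    rwa [← he, hjre] at this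
  have hkR : R.idxOf e < R.length := List.idxOf_lt_length_of_mem heR
  have hgetk : R[R.idxOf e] = e := List.getElem_idxOf hkR
  have := min?_first_spec (fun p : Int × Int => p.2) (R.map (fun i => (i, ykey i))) (R.idxOf e)
    (by simpa using hkR)
    (by
      intro jj hjj
      simp only [List.getElem_map, hgetk]
      have hr : R[jj]'(by simpa using hjj) ∈ R := List.getElem_mem _
      by_cases hne : R[jj]'(by simpa using hjj) = e
      · rw [hne]
      · rcases hfact _ hr hne with h | ⟨h, _⟩ <;> omega)
    (by
      intro jj hjj
      simp only [List.getElem_map, hgetk]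
      have hlt : R[jj]'(by omega) < e := by
        have := List.pairwise_iff_getElem.1 hRpw jj (R.idxOf e) (by omega) hkR hjj
        rwa [hgetk] at this
      have hne : R[jj]'(by omega) ≠ e := ne_of_lt hlt
      have hr : R[jj]'(by omega) ∈ R := List.getElem_mem _
      rcases hfact _ hr hne with h | ⟨h, hlt'⟩
      · omega
      · omega)
  rw [this]
  simp [hgetk]

theorem max_pick (ykey : Int → Int) (run desc : List Int) (hrun : run.Pairwise (· < ·))
    (hdesc : desc.Pairwise (LexK (fun i => -(ykey i)))) (hperm : desc.Perm run)
    (T : PySem.Set Int) (j : Nat) (hj : j < desc.length)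
    (hjtaken : ∀ j' (h : j' < j), desc[j']'(by omega) ∈ T) (hjfree : desc[j] ∉ T) :
    PySem.List.max? ((run.filter (fun i => !(PySem.Set.contains T i))).map
        (fun i => (i, ykey i))) (fun p => p.2)
      = some (desc[j], ykey (desc[j])) := by
  set e := desc[j] with he
  set R := run.filter (fun i => !(PySem.Set.contains T i)) with hR
  have hRpw : R.Pairwise (· < ·) := hrun.filter _
  have hmemR : ∀ r, r ∈ R ↔ r ∈ run ∧ r ∉ T := by
    intro r
    rw [hR, List.mem_filter]
    simp [PySem.Set.contains_iff]
  have heR : e ∈ R := by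
    rw [hmemR]
    exact ⟨hperm.mem_iff.1 (by simp [he]), hjfree⟩
  have hfact : ∀ r ∈ R, r ≠ e → ykey r < ykey e ∨ (ykey e = ykey r ∧ e < r) := by
    intro r hr hne
    have hrdesc : r ∈ desc := hperm.mem_iff.2 ((hmemR r).1 hr).1
    obtain ⟨jr, hjr, hjre⟩ := List.mem_iff_getElem.1 hrdesc
    have hjrj : j < jr := by
      rcases Nat.lt_trichotomy jr j with h | h | h
      · exact absurd (hjre ▸ hjtaken jr h) ((hmemR r).1 hr).2
      · exact absurd (by subst h; rw [he, hjre]) hne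
      · exact h
    have := List.pairwise_iff_getElem.1 hdesc j jr hj hjr hjrj
    rw [← he, hjre] at this
    rcases (show -(ykey e) < -(ykey r) ∨ (-(ykey e) = -(ykey r) ∧ e < r) from this) with h | ⟨h, h'⟩
    · left; omega
    · right; exact ⟨by omega, h'⟩
  have hkR : R.idxOf e < R.length := List.idxOf_lt_length_of_mem heR
  have hgetk : R[R.idxOf e] = e := List.getElem_idxOf hkR
  have := max?_first_spec (fun p : Int × Int => p.2) (R.map (fun i => (i, ykey i))) (R.idxOf e)
    (by simpa using hkR)
    (by
      intro jj hjj
      simp only [List.getElem_map, hgetk]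
      have hr : R[jj]'(by simpa using hjj) ∈ R := List.getElem_mem _
      by_cases hne : R[jj]'(by simpa using hjj) = e
      · rw [hne]
      · rcases hfact _ hr hne with h | ⟨h, _⟩ <;> omega)
    (by
      intro jj hjj
      simp only [List.getElem_map, hgetk]
      have hlt : R[jj]'(by omega) < e := by
        have := List.pairwise_iff_getElem.1 hRpw jj (R.idxOf e) (by omega) hkR hjj
        rwa [hgetk] at this
      have hne : R[jj]'(by omega) ≠ e := ne_of_lt hlt
      have hr : R[jj]'(by omega) ∈ R := List.getElem_mem _
      rcases hfact _ hr hne with h | ⟨h, hlt'⟩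
      · omega
      · omega)
  rw [this]
  simp [hgetk]

theorem filter_add_set (run : List Int) (hrun : run.Pairwise (· < ·)) (T : PySem.Set Int) (e : Int) :
    run.filter (fun i => !(PySem.Set.contains (PySem.Set.add T e) i))
      = (run.filter (fun i => !(PySem.Set.contains T i))).erase e := by
  have hRnd : (run.filter (fun i => !(PySem.Set.contains T i))).Nodup :=
    (hrun.filter _).imp (fun h => ne_of_lt h)
  rw [hRnd.erase_eq_filter, List.filter_filter]
  apply List.filter_congr
  intro i _
  have h1 : PySem.Set.contains (PySem.Set.add T e) i = true ↔ i ∈ T ∨ i = e := by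
    rw [PySem.Set.contains_iff, PySem.Set.mem_add]
  have h2 : PySem.Set.contains T i = true ↔ i ∈ T := PySem.Set.contains_iff T i
  by_cases hiT : i ∈ T <;> by_cases hie : i = e <;>
    simp [h1, h2, hiT, hie] <;> tauto

theorem innerB_succ_true (f : Nat) (ps : List (Int × Int)) (si : List Int) (uy dy rem : Int) :
    innerB true (f+1) ps si uy dy rem =
      (match PySem.List.min? ps (fun p => p.2) with
      | none => (si, uy, dy, rem)
      | some b => innerB false f ((PySem.List.remove? ps b).getD []) (si ++ [b.1])
          (if rem ≤ 2 then b.2 else uy) dy (rem - 1)) := by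
  rw [show innerB true (f+1) ps si uy dy rem =
    (match PySem.List.min? ps (fun p => p.2) with
     | none => (si, uy, dy, rem)
     | some b => innerB false f ((PySem.List.remove? ps b).getD []) (si ++ [b.1])
        (if (true : Bool) ∧ rem ≤ 2 then b.2 else uy)
        (if (¬ (true : Bool)) ∧ rem ≤ 2 then b.2 else dy) (rem - 1)) from rfl]
  cases PySem.List.min? ps (fun p => p.2) with
  | none => rfl
  | some b => by_cases h : rem ≤ 2 <;> simp [h]

theorem innerB_succ_false (f : Nat) (ps : List (Int × Int)) (si : List Int) (uy dy rem : Int) :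
    innerB false (f+1) ps si uy dy rem =
      (match PySem.List.max? ps (fun p => p.2) with
      | none => (si, uy, dy, rem)
      | some b => innerB true f ((PySem.List.remove? ps b).getD []) (si ++ [b.1])
          uy (if rem ≤ 2 then b.2 else dy) (rem - 1)) := by
  rw [show innerB false (f+1) ps si uy dy rem =
    (match PySem.List.max? ps (fun p => p.2) with
     | none => (si, uy, dy, rem)
     | some b => innerB true f ((PySem.List.remove? ps b).getD []) (si ++ [b.1])
        (if (false : Bool) ∧ rem ≤ 2 then b.2 else uy)
        (if (¬ (false : Bool)) ∧ rem ≤ 2 then b.2 else dy) (rem - 1)) from rfl]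
  cases PySem.List.max? ps (fun p => p.2) with
  | none => rfl
  | some b => by_cases h : rem ≤ 2 <;> simp [h]

-- one emission of B's two-pointer loop equals one selection step of innerB
theorem innerLoop_corr (ends : List (List Int)) (n : Int) (run asc desc : List Int)
    (hrun : run.Pairwise (· < ·))
    (hasc : asc.Pairwise (LexK (ykeyB ends))) (hascp : asc.Perm run)
    (hdesc : desc.Pairwise (LexK (fun i => -(ykeyB ends i)))) (hdescp : desc.Perm run) :
    ∀ (fuel : Nat) (T : PySem.Set Int) (tm : Bool) (lo hi : Nat) (si : List Int) (uy dy pos : Int),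
    (∀ j (hj : j < asc.length), j < lo → asc[j] ∈ T) →
    (∀ j (hj : j < desc.length), j < hi → desc[j] ∈ T) →
    (run.filter (fun i => !(PySem.Set.contains T i))).length = fuel →
    innerLoop ends n fuel tm asc desc T lo hi si uy dy pos
      = (let F := innerB tm fuel ((run.filter (fun i => !(PySem.Set.contains T i))).map
            (fun i => (i, ykeyB ends i))) si uy dy (n - pos);
         (F.1, F.2.1, F.2.2.1, n - F.2.2.2)) := by
  intro fuel
  induction fuel with
  | zero =>
    intro T tm lo hi si uy dy pos _ _ _
    rw [innerLoop]
    show _ = ((si, uy, dy, n - (n - pos)) : List Int × Int × Int × Int)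
    have : n - (n - pos) = pos := by omega
    rw [this]
  | succ f ih =>
    intro T tm lo hi si uy dy pos h1 h2 hlen
    set R := run.filter (fun i => !(PySem.Set.contains T i)) with hRdef
    have hRne : R ≠ [] := by
      intro hc; rw [hc] at hlen; simp at hlen
    have hmemR : ∀ r, r ∈ R ↔ r ∈ run ∧ r ∉ T := by
      intro r
      rw [hRdef, List.mem_filter]
      simp [PySem.Set.contains_iff]
    cases tm with
    | true =>
      -- find the first untaken position of asc
      have hex : ∃ x ∈ asc, (!(PySem.Set.contains T x)) = true := by
        obtain ⟨r, hr⟩ := List.exists_mem_of_ne_nil R hRne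
        exact ⟨r, hascp.mem_iff.2 ((hmemR r).1 hr).1,
          by simp [PySem.Set.contains_iff, ((hmemR r).1 hr).2]⟩
      set j := asc.findIdx (fun x => !(PySem.Set.contains T x)) with hjdef
      have hj : j < asc.length := List.findIdx_lt_length_of_exists hex
      have hjfree : asc[j] ∉ T := by
        have := List.findIdx_getElem (w := hj)
        simp only [← hjdef, Bool.not_eq_eq_eq_not] at this
        simp only [PySem.Set.contains_iff] at *
        simpa using this
      have hjtaken : ∀ j' (h : j' < j), asc[j']'(by omega) ∈ T := by
        intro j' h
        have := List.not_of_lt_findIdx (p := fun x => !(PySem.Set.contains T x)) (i := j') (hjdef ▸ h)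
        simp only [Bool.not_eq_eq_eq_not, Bool.not_true] at this
        rw [← PySem.Set.contains_iff]
        simpa using this
      have hloj : lo ≤ j := by
        by_contra hc
        exact hjfree (h1 j hj (by omega))
      have hskip : skipPtr asc T asc.length lo = j :=
        skipPtr_spec asc T j hj asc.length lo hloj (by omega)
          (fun j' a b => hjtaken j' b) hjfree
      have hget : PySem.List.pyGetD asc (j : Int) 0 = asc[j] := by
        rw [PySem.List.pyGetD_natCast, List.getD_eq_getElem?_getD, List.getElem?_eq_getElem hj]
        rfl
      set e := asc[j] with hedef
      have hmin : PySem.List.min? (R.map (fun i => (i, ykeyB ends i))) (fun p => p.2)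
          = some (e, ykeyB ends e) := min_pick (ykeyB ends) run asc hrun hasc hascp T j hj hjtaken hjfree
      have heR : e ∈ R := (hmemR e).2 ⟨hascp.mem_iff.1 (by simp [hedef]), hjfree⟩
      have hePmem : (e, ykeyB ends e) ∈ R.map (fun i => (i, ykeyB ends i)) :=
        List.mem_map.2 ⟨e, heR, rfl⟩
      have hrem : (PySem.List.remove? (R.map (fun i => (i, ykeyB ends i))) (e, ykeyB ends e)).getD []
          = ((run.filter (fun i => !(PySem.Set.contains (PySem.Set.add T e) i))).map
              (fun i => (i, ykeyB ends i))) := by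
        rw [PySem.List.remove?_eq_some_erase _ _ hePmem, Option.getD_some]
        rw [filter_add_set run hrun T e, ← hRdef]
        rw [List.map_erase (f := fun i => (i, ykeyB ends i)) (fun a b hab => by
          simpa using congrArg Prod.fst hab) R]
      rw [innerLoop]
      simp only [if_true]
      rw [hskip, hget]
      rw [innerB_succ_true]
      rw [hmin]
      dsimp only
      rw [hrem]
      have hlen' : (run.filter (fun i => !(PySem.Set.contains (PySem.Set.add T e) i))).length = f := by
        rw [filter_add_set run hrun T e, ← hRdef, List.length_erase_of_mem heR, hlen]
        omega
      have hnp : n - pos - 1 = n - (pos + 1) := by omega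
      rw [hnp]
      exact ih (PySem.Set.add T e) false (j+1) hi (si ++ [e])
        (if n - pos ≤ 2 then ykeyB ends e else uy) dy (pos + 1)
        (by
          intro jj hjj hlt
          rw [PySem.Set.mem_add]
          rcases Nat.lt_or_ge jj j with h | h
          · exact Or.inl (hjtaken jj h)
          · have : jj = j := by omega
            subst this
            exact Or.inr rfl)
        (by
          intro jj hjj hlt
          rw [PySem.Set.mem_add]
          exact Or.inl (h2 jj hjj hlt))
        hlen'
    | false =>
      have hex : ∃ x ∈ desc, (!(PySem.Set.contains T x)) = true := by
        obtain ⟨r, hr⟩ := List.exists_mem_of_ne_nil R hRne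
        exact ⟨r, hdescp.mem_iff.2 ((hmemR r).1 hr).1,
          by simp [PySem.Set.contains_iff, ((hmemR r).1 hr).2]⟩
      set j := desc.findIdx (fun x => !(PySem.Set.contains T x)) with hjdef
      have hj : j < desc.length := List.findIdx_lt_length_of_exists hex
      have hjfree : desc[j] ∉ T := by
        have := List.findIdx_getElem (w := hj)
        simp only [← hjdef, Bool.not_eq_eq_eq_not] at this
        simp only [PySem.Set.contains_iff] at *
        simpa using this
      have hjtaken : ∀ j' (h : j' < j), desc[j']'(by omega) ∈ T := by
        intro j' h
        have := List.not_of_lt_findIdx (p := fun x => !(PySem.Set.contains T x)) (i := j') (hjdef ▸ h)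
        simp only [Bool.not_eq_eq_eq_not, Bool.not_true] at this
        rw [← PySem.Set.contains_iff]
        simpa using this
      have hhij : hi ≤ j := by
        by_contra hc
        exact hjfree (h2 j hj (by omega))
      have hskip : skipPtr desc T desc.length hi = j :=
        skipPtr_spec desc T j hj desc.length hi hhij (by omega)
          (fun j' a b => hjtaken j' b) hjfree
      have hget : PySem.List.pyGetD desc (j : Int) 0 = desc[j] := by
        rw [PySem.List.pyGetD_natCast, List.getD_eq_getElem?_getD, List.getElem?_eq_getElem hj]
        rfl
      set e := desc[j] with hedef
      have hmax : PySem.List.max? (R.map (fun i => (i, ykeyB ends i))) (fun p => p.2)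
          = some (e, ykeyB ends e) :=
        max_pick (ykeyB ends) run desc hrun hdesc hdescp T j hj hjtaken hjfree
      have heR : e ∈ R := (hmemR e).2 ⟨hdescp.mem_iff.1 (by simp [hedef]), hjfree⟩
      have hePmem : (e, ykeyB ends e) ∈ R.map (fun i => (i, ykeyB ends i)) :=
        List.mem_map.2 ⟨e, heR, rfl⟩
      have hrem : (PySem.List.remove? (R.map (fun i => (i, ykeyB ends i))) (e, ykeyB ends e)).getD []
          = ((run.filter (fun i => !(PySem.Set.contains (PySem.Set.add T e) i))).map
              (fun i => (i, ykeyB ends i))) := by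
        rw [PySem.List.remove?_eq_some_erase _ _ hePmem, Option.getD_some]
        rw [filter_add_set run hrun T e, ← hRdef]
        rw [List.map_erase (f := fun i => (i, ykeyB ends i)) (fun a b hab => by
          simpa using congrArg Prod.fst hab) R]
      rw [innerLoop]
      simp only [Bool.false_eq_true, if_false]
      rw [hskip, hget]
      rw [innerB_succ_false]
      rw [hmax]
      dsimp only
      rw [hrem]
      have hlen' : (run.filter (fun i => !(PySem.Set.contains (PySem.Set.add T e) i))).length = f := by
        rw [filter_add_set run hrun T e, ← hRdef, List.length_erase_of_mem heR, hlen]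
        omega
      have hnp : n - pos - 1 = n - (pos + 1) := by omega
      rw [hnp]
      exact ih (PySem.Set.add T e) true lo (j+1) (si ++ [e])
        uy (if n - pos ≤ 2 then ykeyB ends e else dy) (pos + 1)
        (by
          intro jj hjj hlt
          rw [PySem.Set.mem_add]
          exact Or.inl (h1 jj hjj hlt))
        (by
          intro jj hjj hlt
          rw [PySem.Set.mem_add]
          rcases Nat.lt_or_ge jj j with h | h
          · exact Or.inl (hjtaken jj h)
          · have : jj = j := by omega
            subst this
            exact Or.inr rfl)
        hlen'


theorem flatMap_FIs_pairwise (ends : List (List Int)) (xl : List Int)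
    (hxl : xl = ends.map (fun e => PySem.List.pyGetD e (1:Int) 0)) :
    ∀ (L : List Int), L.Pairwise (· < ·) →
      (L.flatMap (fun d => FIs xl 0 d)).Pairwise (LexK (fun i => xkeyB ends i)) := by
  intro L
  induction L with
  | nil => intro _; simp
  | cons d L' ih =>
    intro hpw
    rw [List.flatMap_cons]
    apply List.pairwise_append.2
    refine ⟨?_, ih hpw.of_cons, ?_⟩
    · refine (FIs_pairwise xl d 0).imp_of_mem ?_
      intro a b ha hb hab
      have hka : xkeyB ends a = d := xkey_of_mem_FIs ends d a (hxl ▸ ha)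
      have hkb : xkeyB ends b = d := xkey_of_mem_FIs ends d b (hxl ▸ hb)
      exact Or.inr ⟨show xkeyB ends a = xkeyB ends b by rw [hka, hkb], hab⟩
    · intro a ha b hb
      obtain ⟨d', hd', hbd'⟩ := List.mem_flatMap.1 hb
      have hka : xkeyB ends a = d := xkey_of_mem_FIs ends d a (hxl ▸ ha)
      have hkb : xkeyB ends b = d' := xkey_of_mem_FIs ends d' b (hxl ▸ hbd')
      have : d < d' := (List.pairwise_cons.1 hpw).1 d' hd'
      exact Or.inl (show xkeyB ends a < xkeyB ends b by rw [hka, hkb]; exact this)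

theorem order_eq (ends : List (List Int)) (xl : List Int)
    (hxl : xl = ends.map (fun e => PySem.List.pyGetD e (1:Int) 0)) :
    PySem.List.sorted (PySem.List.pyRange 0 ((ends.length : Int)) 1) (fun i => xkeyB ends i) false
      = (PySem.List.sorted (PySem.Set.ofList xl) (fun x => x) false).flatMap
          (fun d => FIs xl 0 d) := by
  have hxllen : xl.length = ends.length := by rw [hxl]; simp
  have hDSpw : (PySem.List.sorted (PySem.Set.ofList xl) (fun x => x) false).Pairwise (· < ·) :=
    PySem.List.sorted_ofList_pairwise_lt xl
  have hys : ((PySem.List.sorted (PySem.Set.ofList xl) (fun x => x) false).flatMap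
      (fun d => FIs xl 0 d)).Pairwise (LexK (fun i => xkeyB ends i)) :=
    flatMap_FIs_pairwise ends xl hxl _ hDSpw
  have hrange : (PySem.List.pyRange 0 ((ends.length : Int)) 1).Pairwise (· < ·) := by
    rw [PySem.List.pyRange_zero]
    exact (List.pairwise_map).2 ((List.pairwise_lt_range).imp (fun h => by exact_mod_cast h))
  apply sorted_lex_eq _ _ _ hrange _ hys
  apply (List.perm_ext_iff_of_nodup (hys.imp lexK_ne)
    (hrange.imp (fun h => ne_of_lt h))).mpr
  intro x
  constructor
  · intro hx
    obtain ⟨d, _, hxd⟩ := List.mem_flatMap.1 hx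
    obtain ⟨k, hk, hik, _⟩ := (mem_FIs xl d x 0).1 hxd
    rw [PySem.List.mem_pyRange_one]
    rw [hxllen] at hk
    omega
  · intro hx
    rw [PySem.List.mem_pyRange_one] at hx
    have hk : x.toNat < xl.length := by rw [hxllen]; omega
    refine List.mem_flatMap.2 ⟨xl[x.toNat], ?_, ?_⟩
    · rw [PySem.List.mem_sorted, PySem.Set.mem_ofList]
      exact List.getElem_mem _
    · exact (mem_FIs xl _ x 0).2 ⟨x.toNat, hk, by omega, rfl⟩

theorem filter_empty_set (l : List Int) :
    l.filter (fun i => !(PySem.Set.contains (PySem.Set.empty) i)) = l := by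
  apply List.filter_eq_self.2
  intro a _
  have h : PySem.Set.contains (PySem.Set.empty : PySem.Set Int) a = false := by
    rw [Bool.eq_false_iff]
    exact fun hc => (List.not_mem_nil (a := a)) ((PySem.Set.contains_iff _ _).1 hc)
  simp [h]

-- B's outer loop over the runs computes the fold of gstep over the distinct x values
theorem outerB_corr (ends : List (List Int)) (width n : Int) (xl : List Int)
    (hxl : xl = ends.map (fun e => PySem.List.pyGetD e (1:Int) 0)) :
    ∀ (L : List Int) (fuel : Nat) (si : List Int) (uy dy pos : Int),
      L.Pairwise (· < ·) → (∀ d ∈ L, d ∈ xl) →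
      (L.flatMap (fun d => FIs xl 0 d)).length ≤ fuel →
      outerB ends width n fuel (L.flatMap (fun d => FIs xl 0 d)) si uy dy pos
        = (let F := L.foldl (gstep ends width xl) (si, uy, dy, n - pos);
           (F.1, F.2.1, F.2.2.1, n - F.2.2.2)) := by
  intro L
  induction L with
  | nil =>
    intro fuel si uy dy pos _ _ _
    simp only [List.flatMap_nil, List.foldl_nil]
    have hnp : n - (n - pos) = pos := by omega
    cases fuel with
    | zero => rw [outerB]; show _ = (si, uy, dy, n - (n - pos)); rw [hnp]
    | succ f => rw [outerB]; show _ = (si, uy, dy, n - (n - pos)); rw [hnp]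
  | cons d L' ih =>
    intro fuel si uy dy pos hpw hmem hfuel
    have hdx : d ∈ xl := hmem d (by simp)
    have hm1 : 1 ≤ (FIs xl 0 d).length := by
      rw [FIs_length]
      exact List.count_pos_iff.2 hdx
    obtain ⟨o, bt, hblock⟩ : ∃ o bt, FIs xl 0 d = o :: bt := by
      cases hcc : FIs xl 0 d with
      | nil => rw [hcc] at hm1; simp at hm1
      | cons o bt => exact ⟨o, bt, rfl⟩
    have hflat : (d :: L').flatMap (fun e => FIs xl 0 e)
        = o :: (bt ++ L'.flatMap (fun e => FIs xl 0 e)) := by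
      rw [List.flatMap_cons, hblock]; rfl
    set rest := L'.flatMap (fun e => FIs xl 0 e) with hrest
    obtain ⟨f, rfl⟩ : ∃ f, fuel = f + 1 := by
      rw [hflat] at hfuel
      cases fuel
      · simp at hfuel
      · exact ⟨_, rfl⟩
    rw [hflat]
    rw [show outerB ends width n (f + 1) (o :: (bt ++ rest)) si uy dy pos
      = (let run := o :: (bt ++ rest).takeWhile (fun j => decide (xkeyB ends j = xkeyB ends o))
         let t' := (bt ++ rest).dropWhile (fun j => decide (xkeyB ends j = xkeyB ends o))
         if run.length = 1 then
           outerB ends width n f t' (si ++ [PySem.List.pyGetD run (0:Int) 0]) uy dy (pos+1)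
         else
           let asc := PySem.List.sorted run (fun i => ykeyB ends i) false
           let desc := PySem.List.sorted run (fun i => -(ykeyB ends i)) false
           let takeMin := decide (ykeyB ends (PySem.List.pyGetD asc (0:Int) 0) >
             width - ykeyB ends (PySem.List.pyGetD desc (0:Int) 0) - 1)
           let r := innerLoop ends n run.length takeMin asc desc PySem.Set.empty 0 0 si uy dy pos
           outerB ends width n f t' r.1 r.2.1 r.2.2.1 r.2.2.2) from rfl]
    have hko : xkeyB ends o = d := xkey_of_mem_FIs ends d o (by rw [← hxl, hblock]; simp)
    have htw : (bt ++ rest).takeWhile (fun j => decide (xkeyB ends j = xkeyB ends o)) = bt ∧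
        (bt ++ rest).dropWhile (fun j => decide (xkeyB ends j = xkeyB ends o)) = rest := by
      apply takeWhile_append_all
      · intro a ha
        have : xkeyB ends a = d :=
          xkey_of_mem_FIs ends d a (by rw [← hxl, hblock]; simp [ha])
        simp [this, hko]
      · intro hne
        have hhead : (rest.head hne) ∈ rest := List.head_mem hne
        obtain ⟨d', hd', hbd'⟩ := List.mem_flatMap.1
          (show (rest.head hne) ∈ L'.flatMap (fun e => FIs xl 0 e) from hhead)
        have hkb : xkeyB ends (rest.head hne) = d' :=
          xkey_of_mem_FIs ends d' _ (hxl ▸ hbd')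
        have hdd' : d < d' := (List.pairwise_cons.1 hpw).1 d' hd'
        simp [hkb, hko]
        omega
    rw [htw.1, htw.2]
    have hrunblock : o :: bt = FIs xl 0 d := hblock.symm
    have hfuel' : rest.length ≤ f := by
      rw [hflat] at hfuel
      simp only [List.length_cons, List.length_append] at hfuel
      omega
    rw [List.foldl_cons]
    by_cases hone : (o :: bt).length = 1
    · rw [if_pos hone]
      have hbt : bt = [] := by
        simp only [List.length_cons] at hone
        exact List.length_eq_zero_iff.mp (by omega)
      subst hbt
      have hg : gstep ends width xl (si, uy, dy, n - pos) d
          = (si ++ [o], uy, dy, (n - pos) - 1) := by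
        unfold gstep
        rw [← hrunblock]
        simp
      rw [hg]
      rw [show (PySem.List.pyGetD ([o] : List Int) (0:Int) 0) = o from
        PySem.List.pyGetD_zero_cons _ _ _]
      have hnp : (n - pos) - 1 = n - (pos + 1) := by omega
      rw [hnp]
      exact ih f (si ++ [o]) uy dy (pos + 1) hpw.of_cons
        (fun e he => hmem e (by simp [he])) hfuel'
    · rw [if_neg hone]
      have hblockpw : (o :: bt).Pairwise (· < ·) := hrunblock ▸ FIs_pairwise xl d 0
      have hblockne : (o :: bt) ≠ [] := by simp
      have hasc := sorted_lex (ykeyB ends) (o :: bt) hblockpw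
      have hascp := PySem.List.sorted_perm (o :: bt) (fun i => ykeyB ends i) false
      have hdesc := sorted_lex (fun i => -(ykeyB ends i)) (o :: bt) hblockpw
      have hdescp := PySem.List.sorted_perm (o :: bt) (fun i => -(ykeyB ends i)) false
      -- the head values of the two sorted orders are the min / max of the ys
      obtain ⟨a0, ta, hasceq⟩ : ∃ a0 ta,
          PySem.List.sorted (o :: bt) (fun i => ykeyB ends i) false = a0 :: ta := by
        cases hcc : PySem.List.sorted (o :: bt) (fun i => ykeyB ends i) false with
        | nil => exact absurd ((PySem.List.sorted_eq_nil_iff _ _ _).1 hcc) hblockne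
        | cons a0 ta => exact ⟨a0, ta, rfl⟩
      obtain ⟨d0, td, hdesceq⟩ : ∃ d0 td,
          PySem.List.sorted (o :: bt) (fun i => -(ykeyB ends i)) false = d0 :: td := by
        cases hcc : PySem.List.sorted (o :: bt) (fun i => -(ykeyB ends i)) false with
        | nil => exact absurd ((PySem.List.sorted_eq_nil_iff _ _ _).1 hcc) hblockne
        | cons d0 td => exact ⟨d0, td, rfl⟩
      have hysne : ((o :: bt).map (fun i => ykeyB ends i)) ≠ [] := by simp
      obtain ⟨mn, hmn⟩ : ∃ mn, PySem.List.min? ((o :: bt).map (fun i => ykeyB ends i))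
          (fun y => y) = some mn := by
        cases hc : PySem.List.min? ((o :: bt).map (fun i => ykeyB ends i)) (fun y => y) with
        | none => exact absurd ((PySem.List.min?_eq_none_iff _ _).1 hc) hysne
        | some mn => exact ⟨mn, rfl⟩
      obtain ⟨mx, hmx⟩ : ∃ mx, PySem.List.max? ((o :: bt).map (fun i => ykeyB ends i))
          (fun y => y) = some mx := by
        cases hc : PySem.List.max? ((o :: bt).map (fun i => ykeyB ends i)) (fun y => y) with
        | none => exact absurd ((PySem.List.max?_eq_none_iff _ _).1 hc) hysne
        | some mx => exact ⟨mx, rfl⟩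
      have hmn_eq : mn = ykeyB ends a0 := by
        have hmem0 : mn ∈ (o :: bt).map (fun i => ykeyB ends i) := PySem.List.min?_mem hmn
        obtain ⟨r0, hr0, hr0e⟩ := List.mem_map.1 hmem0
        have h1 : ∀ y ∈ (o :: bt), ykeyB ends a0 ≤ ykeyB ends y :=
          PySem.List.key_head_sorted_le (o :: bt) (fun i => ykeyB ends i) hasceq
        have h2 : mn ≤ ykeyB ends a0 := by
          refine PySem.List.min?_isMin hmn _ (List.mem_map.2 ⟨a0, ?_, rfl⟩)
          exact hascp.mem_iff.1 (by rw [hasceq]; simp)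
        have h3 : ykeyB ends a0 ≤ mn := hr0e ▸ h1 r0 hr0
        omega
      have hmx_eq : mx = ykeyB ends d0 := by
        have hmem0 : mx ∈ (o :: bt).map (fun i => ykeyB ends i) := PySem.List.max?_mem hmx
        obtain ⟨r0, hr0, hr0e⟩ := List.mem_map.1 hmem0
        have h1 : ∀ y ∈ (o :: bt), -(ykeyB ends d0) ≤ -(ykeyB ends y) :=
          PySem.List.key_head_sorted_le (o :: bt) (fun i => -(ykeyB ends i)) hdesceq
        have h2 : ykeyB ends d0 ≤ mx := by
          refine PySem.List.max?_isMax hmx _ (List.mem_map.2 ⟨d0, ?_, rfl⟩)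
          exact hdescp.mem_iff.1 (by rw [hdesceq]; simp)
        have h3 : mx ≤ ykeyB ends d0 := by
          have := h1 r0 hr0
          omega
        omega
      have hg : gstep ends width xl (si, uy, dy, n - pos) d
          = innerB (decide (mn > width - mx - 1)) (o :: bt).length
              ((o :: bt).map (fun i => (i, ykeyB ends i))) si uy dy (n - pos) := by
        unfold gstep
        rw [← hrunblock]
        rw [if_neg hone]
        dsimp only
        rw [List.map_map]
        rw [show ((fun p : Int × Int => p.2) ∘ (fun i =>
            (i, PySem.List.pyGetD (PySem.List.pyGetD ends i []) (0:Int) 0)))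
          = (fun i => ykeyB ends i) from rfl]
        rw [show (fun i => (i, PySem.List.pyGetD (PySem.List.pyGetD ends i []) (0:Int) 0))
          = (fun i => (i, ykeyB ends i)) from rfl]
        rw [hmn, hmx]
        dsimp only
        rw [List.length_map]
      have hil := innerLoop_corr ends n (o :: bt)
        (PySem.List.sorted (o :: bt) (fun i => ykeyB ends i) false)
        (PySem.List.sorted (o :: bt) (fun i => -(ykeyB ends i)) false)
        hblockpw hasc hascp hdesc hdescp
        (o :: bt).length PySem.Set.empty (decide (mn > width - mx - 1)) 0 0 si uy dy pos
        (by intro j hj h; omega) (by intro j hj h; omega)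
        (by rw [filter_empty_set])
      rw [filter_empty_set] at hil
      have hgetasc : PySem.List.pyGetD
          (PySem.List.sorted (o :: bt) (fun i => ykeyB ends i) false) (0:Int) 0 = a0 := by
        rw [hasceq]; exact PySem.List.pyGetD_zero_cons _ _ _
      have hgetdesc : PySem.List.pyGetD
          (PySem.List.sorted (o :: bt) (fun i => -(ykeyB ends i)) false) (0:Int) 0 = d0 := by
        rw [hdesceq]; exact PySem.List.pyGetD_zero_cons _ _ _
      dsimp only
      rw [hgetasc, hgetdesc, ← hmn_eq, ← hmx_eq]
      rw [hil, hg]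
      set F := innerB (decide (mn > width - mx - 1)) (o :: bt).length
          ((o :: bt).map (fun i => (i, ykeyB ends i))) si uy dy (n - pos) with hF
      have hFeta : F = (F.1, F.2.1, F.2.2.1, F.2.2.2) := rfl
      rw [hFeta]
      dsimp only
      have := ih f F.1 F.2.1 F.2.2.1 (n - F.2.2.2) hpw.of_cons
        (fun e he => hmem e (by simp [he])) hfuel'
      rw [this]
      have hcancel : n - (n - F.2.2.2) = F.2.2.2 := by omega
      rw [hcancel]

-- ===== VERDICT (by name: the statement is the Claim_ definition above) =====
theorem rank_ends_spec : Claim_equal_rank_ends := by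
  intro ends shape _hdom _hpre
  unfold Spec_rank_ends
  -- A's side: reduce to the fold of gstep over the sorted distinct x values
  have hA : rank_ends ends shape
      = (let st := (PySem.List.sorted
            (PySem.Set.ofList (ends.map (fun e => PySem.List.pyGetD e (1:Int) 0))) (fun x => x) false).foldl
            (gstep ends (shape.length : Int) (ends.map (fun e => PySem.List.pyGetD e (1:Int) 0)))
            ([], -1, -1, (ends.length : Int));
         (st.1, st.2.1, st.2.2.1)) := by
    unfold rank_ends
    dsimp only
    rw [PySem.List.foldl_append_singleton_eq_map (fun e => PySem.List.pyGetD e (1:Int) 0) ends []]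
    rw [List.nil_append]
    set xl := ends.map (fun e => PySem.List.pyGetD e (1:Int) 0) with hxl
    set DS := PySem.List.sorted (PySem.Set.ofList xl) (fun x => x) false with hDS
    have hblocks : PySem.List.sorted xl (fun x => x) false
        = DS.flatMap (fun e => List.replicate (xl.count e) e) := sorted_blocks xl
    have hlen : (ends.length : Int)
        = ((DS.flatMap (fun e => List.replicate (xl.count e) e)).length : Int) := by
      rw [← hblocks, PySem.List.length_sorted, hxl, List.length_map]
    rw [hblocks, hlen]
    exact outer_corr ends (shape.length : Int) xl DS
      (DS.flatMap (fun e => List.replicate (xl.count e) e)).length [] (-1) (-1)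
      (PySem.List.sorted_ofList_pairwise_lt xl)
      (fun e he => (PySem.Set.mem_ofList xl e).1 ((PySem.List.mem_sorted _ _ _ _).1 he))
      le_rfl
  -- B's side: reduce to the same fold
  have hB : rank_ends_alt ends shape
      = (let st := (PySem.List.sorted
            (PySem.Set.ofList (ends.map (fun e => PySem.List.pyGetD e (1:Int) 0))) (fun x => x) false).foldl
            (gstep ends (shape.length : Int) (ends.map (fun e => PySem.List.pyGetD e (1:Int) 0)))
            ([], -1, -1, (ends.length : Int));
         (st.1, st.2.1, st.2.2.1)) := by
    unfold rank_ends_alt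
    dsimp only
    set xl := ends.map (fun e => PySem.List.pyGetD e (1:Int) 0) with hxl
    rw [order_eq ends xl hxl]
    set DS := PySem.List.sorted (PySem.Set.ofList xl) (fun x => x) false with hDS
    have hoc := outerB_corr ends (shape.length : Int) (ends.length : Int) xl hxl DS
      (DS.flatMap (fun d => FIs xl 0 d)).length [] (-1) (-1) 0
      (PySem.List.sorted_ofList_pairwise_lt xl)
      (fun e he => (PySem.Set.mem_ofList xl e).1 ((PySem.List.mem_sorted _ _ _ _).1 he))
      le_rfl
    rw [hoc]
    have hsub : (ends.length : Int) - 0 = (ends.length : Int) := by omega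
    rw [hsub]
  rw [hA, hB]
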